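-- pv_equiv track=rewrite | github.com/GundalaNikhil/DSA | dsa-problems/generate_stringsclassic_testcases_complete.py | diff_substrings_two_strings
-- ===== SOURCE A (Python) =====
-- def build_suffix_array(s):
--     """Build suffix array using doubling algorithm."""
--     n = len(s)
--     suffixes = list(range(n))
--     rank = [ord(c) for c in s]
--     temp_rank = [0] * n
--     k = 1
--
--     while k < n:
--         # Sort by (rank[i], rank[i+k])
--         suffixes.sort(key=lambda i: (rank[i], rank[i + k] if i + k < n else -1))
--
--         # Update ranks
--         temp_rank[suffixes[0]] = 0
--         for i in range(1, n):
--             prev = suffixes[i - 1]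
--             curr = suffixes[i]
--             if (rank[curr], rank[curr + k] if curr + k < n else -1) == \
--                (rank[prev], rank[prev + k] if prev + k < n else -1):
--                 temp_rank[curr] = temp_rank[prev]
--             else:
--                 temp_rank[curr] = temp_rank[prev] + 1
--
--         rank = temp_rank[:]
--         k *= 2
--
--     return suffixes
--
-- def kasai_lcp(s, sa):
--     """Compute LCP array using Kasai's algorithm."""
--     n = len(s)
--     rank = [0] * n
--     for i in range(n):
--         rank[sa[i]] = i
--
--     lcp = [0] * n
--     h = 0
--
--     for i in range(n):
--         if rank[i] > 0:
--             j = sa[rank[i] - 1]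
--             while i + h < n and j + h < n and s[i + h] == s[j + h]:
--                 h += 1
--             lcp[rank[i]] = h
--             if h > 0:
--                 h -= 1
--
--     return lcp
--
-- def count_distinct_substrings(s):
--     """Count distinct substrings using suffix array."""
--     n = len(s)
--     if n == 0:
--         return 0
--
--     sa = build_suffix_array(s)
--     lcp = kasai_lcp(s, sa)
--
--     # Total substrings - duplicates
--     total = n * (n + 1) // 2
--     duplicates = sum(lcp)
--
--     return total - duplicates
--
-- def diff_substrings_two_strings(s1, s2):
--     """Count substrings in s1 not in s2."""
--     total_s1 = count_distinct_substrings(s1)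
--
--     # Count common substrings (simplified approach)
--     all_substrings_s2 = set()
--     for i in range(len(s2)):
--         for j in range(i + 1, len(s2) + 1):
--             all_substrings_s2.add(s2[i:j])
--
--     common = 0
--     for i in range(len(s1)):
--         for j in range(i + 1, len(s1) + 1):
--             if s1[i:j] in all_substrings_s2:
--                 common += 1
--
--     # Count distinct common
--     common_distinct = len(set(s1[i:j] for i in range(len(s1)) for j in range(i+1, len(s1)+1)) & all_substrings_s2)
--
--     return total_s1 - common_distinct
-- ===== SOURCE B (Python) =====
-- def _lcp(a, b):
--     """Length of the longest common prefix of a and b (recursive)."""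
--     if a and b and a[0] == b[0]:
--         return 1 + _lcp(a[1:], b[1:])
--     return 0
--
-- def diff_substrings_two_strings(s1, s2):
--     """Count substrings in s1 not in s2."""
--     n = len(s1)
--     total = 0
--     if n:
--         # sort the suffixes directly, then subtract common prefixes of neighbours
--         order = sorted(range(n), key=lambda i: s1[i:])
--         dup = 0
--         for r in range(1, n):
--             dup += _lcp(s1[order[r - 1]:], s1[order[r]:])
--         total = n * (n + 1) // 2 - dup
--     set1 = {s1[i:j] for i in range(n) for j in range(i + 1, n + 1)}
--     set2 = {s2[i:j] for i in range(len(s2)) for j in range(i + 1, len(s2) + 1)}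
--     return total - len(set1 & set2)
-- ===== Notes on version B (the rewrite author's own statement) =====
-- stated objective: simpler
-- what changed: Replaces the doubling suffix-array construction with a direct sort of the suffixes, replaces Kasai's h-reuse LCP algorithm with a plain character-by-character comparison of neighbouring suffixes, drops the dead 'common' counter, and computes the common-substring count directly as the size of the intersection of the two substring sets.
import Mathlib
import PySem

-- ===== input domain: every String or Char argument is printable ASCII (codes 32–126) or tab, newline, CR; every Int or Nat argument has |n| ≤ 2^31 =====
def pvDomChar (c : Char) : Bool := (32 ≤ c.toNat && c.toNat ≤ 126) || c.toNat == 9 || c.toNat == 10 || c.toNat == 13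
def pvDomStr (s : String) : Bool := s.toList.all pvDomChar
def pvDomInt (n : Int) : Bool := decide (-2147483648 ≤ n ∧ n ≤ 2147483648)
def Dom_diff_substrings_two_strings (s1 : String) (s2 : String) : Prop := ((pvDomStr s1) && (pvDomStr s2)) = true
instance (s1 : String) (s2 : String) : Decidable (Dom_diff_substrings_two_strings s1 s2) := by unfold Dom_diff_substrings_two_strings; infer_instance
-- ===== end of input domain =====

-- B replaces the doubling suffix array by a direct sort of the suffixes and Kasai's
-- algorithm by a plain character comparison of neighbouring suffixes (objective: simpler).

-- ===== PORT A =====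

-- the rank-update pass of build_suffix_array (temp_rank[suffixes[0]] = 0; for i in range(1, n): …)
def pvRankUpdate (rank : List Int) (n k : Int) (suffixes temp0 : List Int) : List Int :=
  let temp1 := PySem.List.pySetD temp0 (PySem.List.pyGetD suffixes 0 0) 0
  (PySem.List.pyRange 1 n 1).foldl (fun t i =>
    let prev := PySem.List.pyGetD suffixes (i - 1) 0
    let curr := PySem.List.pyGetD suffixes i 0
    if PySem.List.pyGetD rank curr 0 = PySem.List.pyGetD rank prev 0 ∧
        (if curr + k < n then PySem.List.pyGetD rank (curr + k) 0 else -1)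
          = (if prev + k < n then PySem.List.pyGetD rank (prev + k) 0 else -1) then
      PySem.List.pySetD t curr (PySem.List.pyGetD t prev 0)
    else
      PySem.List.pySetD t curr (PySem.List.pyGetD t prev 0 + 1)) temp1

-- the 'while k < n' doubling loop of build_suffix_array
def pvSaLoop (n : Int) (suffixes rank temp : List Int) (k : Int) (hk : 0 < k) : List Int :=
  if h : k < n then
    let suffixes' := PySem.List.sorted2 suffixes
        (fun i => PySem.List.pyGetD rank i 0)
        (fun i => if i + k < n then PySem.List.pyGetD rank (i + k) 0 else -1) false
    let temp' := pvRankUpdate rank n k suffixes' temp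
    pvSaLoop n suffixes' temp' temp' (2 * k) (by omega)
  else suffixes
termination_by (n - k).toNat
decreasing_by omega

def pvBuildSuffixArray (cs : List Char) : List Int :=
  let n : Int := cs.length
  let suffixes := PySem.List.pyRange 0 n 1
  let rank : List Int := cs.map (fun c => (c.toNat : Int))
  let temp : List Int := List.replicate cs.length 0
  pvSaLoop n suffixes rank temp 1 (by norm_num)

-- the 'while i + h < n and j + h < n and s[i+h] == s[j+h]: h += 1' loop of kasai_lcp
def pvKasaiExtend (cs : List Char) (n i j : Int) (h : Int) : Int :=
  if hc : i + h < n ∧ j + h < n ∧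
      PySem.List.pyGetD cs (i + h) ' ' = PySem.List.pyGetD cs (j + h) ' ' then
    pvKasaiExtend cs n i j (h + 1)
  else h
termination_by (n - (i + h)).toNat
decreasing_by omega

def pvKasaiLcp (cs : List Char) (sa : List Int) : List Int :=
  let n : Int := cs.length
  let rank := (PySem.List.pyRange 0 n 1).foldl
    (fun r i => PySem.List.pySetD r (PySem.List.pyGetD sa i 0) i) (List.replicate cs.length 0)
  let st := (PySem.List.pyRange 0 n 1).foldl (fun (st : List Int × Int) i =>
    if 0 < PySem.List.pyGetD rank i 0 then
      let j := PySem.List.pyGetD sa (PySem.List.pyGetD rank i 0 - 1) 0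
      let h' := pvKasaiExtend cs n i j st.2
      (PySem.List.pySetD st.1 (PySem.List.pyGetD rank i 0) h',
       if 0 < h' then h' - 1 else h')
    else st) (List.replicate cs.length 0, 0)
  st.1

def pvCountDistinct (cs : List Char) : Int :=
  let n : Int := cs.length
  if n = 0 then 0
  else
    let sa := pvBuildSuffixArray cs
    let lcp := pvKasaiLcp cs sa
    PySem.Int.floordiv (n * (n + 1)) 2 - lcp.sum

def diff_substrings_two_strings (s1 s2 : String) : Int :=
  let cs1 := s1.toList
  let cs2 := s2.toList
  let total_s1 := pvCountDistinct cs1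
  let all2 : PySem.Set (List Char) :=
    (PySem.List.pyRange 0 (cs2.length : Int) 1).foldl (fun st i =>
      (PySem.List.pyRange (i + 1) ((cs2.length : Int) + 1) 1).foldl (fun st j =>
        PySem.Set.add st (PySem.List.slice cs2 (some i) (some j))) st) PySem.Set.empty
  let _common : Int :=
    (PySem.List.pyRange 0 (cs1.length : Int) 1).foldl (fun c i =>
      (PySem.List.pyRange (i + 1) ((cs1.length : Int) + 1) 1).foldl (fun c j =>
        if PySem.Set.contains all2 (PySem.List.slice cs1 (some i) (some j)) then c + 1 else c) c) 0
  let set1 : PySem.Set (List Char) := PySem.Set.ofList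
    ((PySem.List.pyRange 0 (cs1.length : Int) 1).flatMap (fun i =>
      (PySem.List.pyRange (i + 1) ((cs1.length : Int) + 1) 1).map (fun j =>
        PySem.List.slice cs1 (some i) (some j))))
  let common_distinct := PySem.Set.len (PySem.Set.inter set1 all2)
  total_s1 - common_distinct

-- ===== PORT B =====

-- _lcp of Source B: longest common prefix length, recursively
def pvLcpB (a b : List Char) : Int :=
  match a, b with
  | x :: a', y :: b' => if x = y then 1 + pvLcpB a' b' else 0
  | _, _ => 0

def diff_substrings_two_strings_alt (s1 s2 : String) : Int :=
  let cs1 := s1.toList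
  let n := cs1.length
  let total : Int :=
    if n ≠ 0 then
      let order := PySem.List.sorted (PySem.List.pyRange 0 (n : Int) 1)
        (fun i => PySem.List.slice cs1 (some i) none) false
      let dup := (PySem.List.pyRange 1 (n : Int) 1).foldl (fun d r =>
        d + pvLcpB (PySem.List.slice cs1 (some (PySem.List.pyGetD order (r - 1) 0)) none)
                   (PySem.List.slice cs1 (some (PySem.List.pyGetD order r 0)) none)) 0
      PySem.Int.floordiv ((n : Int) * ((n : Int) + 1)) 2 - dup
    else 0
  let cs2 := s2.toList
  let set1 : PySem.Set (List Char) := PySem.Set.ofList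
    ((PySem.List.pyRange 0 (n : Int) 1).flatMap (fun i =>
      (PySem.List.pyRange (i + 1) ((n : Int) + 1) 1).map (fun j =>
        PySem.List.slice cs1 (some i) (some j))))
  let set2 : PySem.Set (List Char) := PySem.Set.ofList
    ((PySem.List.pyRange 0 (cs2.length : Int) 1).flatMap (fun i =>
      (PySem.List.pyRange (i + 1) ((cs2.length : Int) + 1) 1).map (fun j =>
        PySem.List.slice cs2 (some i) (some j))))
  total - PySem.Set.len (PySem.Set.inter set1 set2)

-- ===== PRECONDITION & SPEC =====
def Spec_diff_substrings_two_strings (s1 : String) (s2 : String) (out : Int) : Prop := out = diff_substrings_two_strings_alt s1 s2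
instance (s1 : String) (s2 : String) (out : Int) : Decidable (Spec_diff_substrings_two_strings s1 s2 out) := by unfold Spec_diff_substrings_two_strings; infer_instance

-- ===== CLAIM (what is proved, stated in full; the proofs are below) =====
def Claim_equal_diff_substrings_two_strings : Prop := ∀ (s1 : String) (s2 : String), Dom_diff_substrings_two_strings s1 s2 → Spec_diff_substrings_two_strings s1 s2 (diff_substrings_two_strings s1 s2)

-- ===== LEMMAS AND PROOFS =====

-- ---------- lexicographic order on List Char ----------

theorem pvLex_nil_lt {b : List Char} (hb : b ≠ []) : ([] : List Char) < b := by
  cases b with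
  | nil => exact absurd rfl hb
  | cons c t => exact List.nil_lt_cons c t

theorem pvLex_lt_append {a b y : List Char} (h : a < b) : a < b ++ y := by
  induction a generalizing b with
  | nil =>
    cases b with
    | nil => exact absurd h (lt_irrefl _)
    | cons c t => exact List.nil_lt_cons c (t ++ y)
  | cons c a' ih =>
    cases b with
    | nil => exact absurd h (by intro hlt; exact absurd hlt (not_lt.mpr (le_of_lt (pvLex_nil_lt (by simp)))))
    | cons d b' =>
      rcases List.cons_lt_cons_iff.mp h with h1 | ⟨h1, h2⟩
      · exact List.cons_lt_cons_iff.mpr (Or.inl h1)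
      · exact List.cons_lt_cons_iff.mpr (Or.inr ⟨h1, ih h2⟩)

theorem pvLex_append_left_lt {x y : List Char} (a : List Char) (h : x < y) : a ++ x < a ++ y := by
  induction a with
  | nil => simpa using h
  | cons c a' ih => exact List.cons_lt_cons_iff.mpr (Or.inr ⟨rfl, ih⟩)

theorem pvLex_lt_of_not_prefix {a b : List Char} (h : a < b) (hp : ¬ a <+: b) :
    ∀ x y, a ++ x < b ++ y := by
  induction a generalizing b with
  | nil => exact absurd (List.nil_prefix) hp
  | cons c a' ih =>
    cases b with
    | nil =>
      intro x y
      exact absurd h (by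
        intro hlt
        exact absurd hlt (not_lt.mpr (le_of_lt (pvLex_nil_lt (by simp)))))
    | cons d b' =>
      intro x y
      rcases List.cons_lt_cons_iff.mp h with h1 | ⟨h1, h2⟩
      · exact List.cons_lt_cons_iff.mpr (Or.inl h1)
      · subst h1
        have hp' : ¬ a' <+: b' := fun hh => hp (List.prefix_cons_inj _ |>.mpr hh)
        exact List.cons_lt_cons_iff.mpr (Or.inr ⟨rfl, ih h2 hp' x y⟩)

-- ---------- suffixes and truncated suffixes ----------

def pvSufx (cs : List Char) (i : Int) : List Char := cs.drop i.toNat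

def pvSufK (cs : List Char) (k i : Int) : List Char := (cs.drop i.toNat).take k.toNat

theorem pvSufK_append (cs : List Char) {k i : Int} (hk : 0 ≤ k) (hi : 0 ≤ i) :
    pvSufK cs (2 * k) i = pvSufK cs k i ++ pvSufK cs k (i + k) := by
  unfold pvSufK
  have h2 : (2 * k).toNat = k.toNat + k.toNat := by omega
  have h3 : (i + k).toNat = i.toNat + k.toNat := by omega
  rw [h2, h3, List.take_add, List.drop_drop]

theorem pvSufx_length (cs : List Char) (i : Int) : (pvSufx cs i).length = cs.length - i.toNat := by
  simp [pvSufx]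

theorem pvSufx_inj (cs : List Char) {i j : Int} (hi : i.toNat ≤ cs.length) (hj : j.toNat ≤ cs.length)
    (h : pvSufx cs i = pvSufx cs j) : i.toNat = j.toNat := by
  have := congrArg List.length h
  simp [pvSufx] at this
  omega

theorem pvSufK_eq_sufx (cs : List Char) {k i : Int} (h : (cs.length : Int) ≤ i + k) (hi : 0 ≤ i) :
    pvSufK cs k i = pvSufx cs i := by
  unfold pvSufK pvSufx
  apply List.take_of_length_le
  simp
  omega

-- ---------- pair (tuple) order on Int × Int ----------

def pvPairLt (p q : Int × Int) : Prop := p.1 < q.1 ∨ (p.1 = q.1 ∧ p.2 < q.2)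
def pvPairLe (p q : Int × Int) : Prop := p.1 < q.1 ∨ (p.1 = q.1 ∧ p.2 ≤ q.2)

theorem pvPairLe_iff_not_lt (p q : Int × Int) : pvPairLe p q ↔ ¬ pvPairLt q p := by
  unfold pvPairLe pvPairLt; omega

theorem pvPairLt_trans {p q r : Int × Int} (h1 : pvPairLt p q) (h2 : pvPairLt q r) : pvPairLt p r := by
  unfold pvPairLt at *; omega

theorem pvPairLe_antisymm {p q : Int × Int} (h1 : pvPairLe p q) (h2 : pvPairLe q p) : p = q := by
  obtain ⟨a, b⟩ := p; obtain ⟨c, d⟩ := q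
  unfold pvPairLe at *
  simp only [Prod.mk.injEq]
  constructor <;> omega

-- ---------- pairwise order of insertion sort (sorted2) ----------

theorem pvInsertBy_pairwise {α : Type} (before : α → α → Bool)
    (htr : ∀ a b c, before a b = true → before b c = true → before a c = true)
    (hasym : ∀ a b, before a b = true → before b a = false)
    (x : α) (ys : List α) (hys : ys.Pairwise (fun a b => before b a = false)) :
    (PySem.List.insertBy before x ys).Pairwise (fun a b => before b a = false) := by
  induction ys with
  | nil => simp [PySem.List.insertBy]
  | cons y ys ih =>
    by_cases hxy : before x y = true
    · rw [show PySem.List.insertBy before x (y :: ys) = x :: y :: ys by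
        simp [PySem.List.insertBy, hxy]]
      refine List.Pairwise.cons ?_ hys
      intro z hz
      rcases List.mem_cons.mp hz with hz | hz
      · subst hz; exact hasym _ _ hxy
      · rcases List.pairwise_cons.mp hys with ⟨hy, _⟩
        have hzy := hy z hz
        by_cases hzx : before z x = true
        · exact absurd (htr z x y hzx hxy) (by simp [hzy])
        · simpa using hzx
    · rw [show PySem.List.insertBy before x (y :: ys) = y :: PySem.List.insertBy before x ys by
        simp [PySem.List.insertBy, hxy]]
      rcases List.pairwise_cons.mp hys with ⟨hy, hys'⟩
      refine List.Pairwise.cons ?_ (ih hys')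
      intro z hz
      rcases (PySem.List.mem_insertBy before x z ys).mp hz with hz | hz
      · subst hz; simpa using hxy
      · exact hy z hz

theorem pvFoldl_insertBy_pairwise {α : Type} (before : α → α → Bool)
    (htr : ∀ a b c, before a b = true → before b c = true → before a c = true)
    (hasym : ∀ a b, before a b = true → before b a = false)
    (xs acc : List α) (hacc : acc.Pairwise (fun a b => before b a = false)) :
    (xs.foldl (fun acc x => PySem.List.insertBy before x acc) acc).Pairwise
      (fun a b => before b a = false) := by
  induction xs generalizing acc with
  | nil => simpa using hacc
  | cons x xs ih =>
    simp only [List.foldl_cons]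
    exact ih _ (pvInsertBy_pairwise before htr hasym x acc hacc)

theorem pvSorted2_pairwise (xs : List Int) (k1 k2 : Int → Int) :
    (PySem.List.sorted2 xs k1 k2 false).Pairwise
      (fun a b => pvPairLe (k1 a, k2 a) (k1 b, k2 b)) := by
  have hdef : PySem.List.sorted2 xs k1 k2 false =
      xs.foldl (fun acc x => PySem.List.insertBy
        (fun a b => decide (k1 a < k1 b) || (!decide (k1 b < k1 a) && decide (k2 a < k2 b))) x acc) [] := by
    rfl
  rw [hdef]
  have hiff : ∀ a b : Int,
      ((fun a b => decide (k1 a < k1 b) || (!decide (k1 b < k1 a) && decide (k2 a < k2 b))) a b = true)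
        ↔ pvPairLt (k1 a, k2 a) (k1 b, k2 b) := by
    intro a b
    simp [pvPairLt]
    omega
  have hp := pvFoldl_insertBy_pairwise
    (fun a b => decide (k1 a < k1 b) || (!decide (k1 b < k1 a) && decide (k2 a < k2 b)))
    (by intro a b c h1 h2; rw [hiff] at *; exact pvPairLt_trans h1 h2)
    (by intro a b h1
        rw [hiff] at h1
        rw [Bool.eq_false_iff, ne_eq, hiff]
        intro h2
        have := pvPairLt_trans h1 h2
        unfold pvPairLt at this; omega)
    xs [] (by simp)
  refine hp.imp_of_mem ?_
  intro a b _ _ h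
  rw [pvPairLe_iff_not_lt]
  rw [Bool.eq_false_iff, ne_eq, hiff] at h
  exact h

-- ---------- rank invariants for the doubling loop ----------

def pvPk (rank : List Int) (n k i : Int) : Int × Int :=
  (PySem.List.pyGetD rank i 0, if i + k < n then PySem.List.pyGetD rank (i + k) 0 else -1)

def pvGoodRank (cs : List Char) (k : Int) (rank : List Int) : Prop :=
  rank.length = cs.length ∧
  (∀ i : Int, 0 ≤ i → i < (cs.length : Int) → 0 ≤ PySem.List.pyGetD rank i 0) ∧
  (∀ i j : Int, 0 ≤ i → i < (cs.length : Int) → 0 ≤ j → j < (cs.length : Int) →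
    (PySem.List.pyGetD rank i 0 ≤ PySem.List.pyGetD rank j 0 ↔ pvSufK cs k i ≤ pvSufK cs k j))

theorem pvGoodRank_lt_iff {cs : List Char} {k : Int} {rank : List Int} (hg : pvGoodRank cs k rank)
    {i j : Int} (hi0 : 0 ≤ i) (hi : i < (cs.length : Int)) (hj0 : 0 ≤ j) (hj : j < (cs.length : Int)) :
    (PySem.List.pyGetD rank i 0 < PySem.List.pyGetD rank j 0 ↔ pvSufK cs k i < pvSufK cs k j) := by
  have h1 := hg.2.2 i j hi0 hi hj0 hj
  have h2 := hg.2.2 j i hj0 hj hi0 hi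
  constructor
  · intro h
    rcases lt_or_ge (pvSufK cs k i) (pvSufK cs k j) with h' | h'
    · exact h'
    · exact absurd (h2.mpr h') (by omega)
  · intro h
    rcases lt_or_ge (PySem.List.pyGetD rank i 0) (PySem.List.pyGetD rank j 0) with h' | h'
    · exact h'
    · exact absurd (h2.mp h') (not_le.mpr h)

theorem pvGoodRank_eq_iff {cs : List Char} {k : Int} {rank : List Int} (hg : pvGoodRank cs k rank)
    {i j : Int} (hi0 : 0 ≤ i) (hi : i < (cs.length : Int)) (hj0 : 0 ≤ j) (hj : j < (cs.length : Int)) :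
    (PySem.List.pyGetD rank i 0 = PySem.List.pyGetD rank j 0 ↔ pvSufK cs k i = pvSufK cs k j) := by
  have h1 := hg.2.2 i j hi0 hi hj0 hj
  have h2 := hg.2.2 j i hj0 hj hi0 hi
  constructor
  · intro h
    exact le_antisymm (h1.mp (by omega)) (h2.mp (by omega))
  · intro h
    have ha := h1.mpr (le_of_eq h)
    have hb := h2.mpr (le_of_eq h.symm)
    omega

theorem pvSufK_length (cs : List Char) (k i : Int) :
    (pvSufK cs k i).length = min k.toNat (cs.length - i.toNat) := by
  simp [pvSufK]

theorem pvSufK_nil_of_ge (cs : List Char) {k i : Int} (h : (cs.length : Int) ≤ i) :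
    pvSufK cs k i = [] := by
  unfold pvSufK
  rw [List.drop_eq_nil_of_le (by omega), List.take_nil]

theorem pvSufK_ne_nil (cs : List Char) {k i : Int} (hk : 1 ≤ k) (hi0 : 0 ≤ i)
    (hi : i < (cs.length : Int)) : pvSufK cs k i ≠ [] := by
  have := pvSufK_length cs k i
  intro h
  rw [h] at this
  simp at this
  omega

theorem pvPairLe_iff_lt_or_eq (p q : Int × Int) : pvPairLe p q ↔ pvPairLt p q ∨ p = q := by
  obtain ⟨a, b⟩ := p; obtain ⟨c, d⟩ := q
  unfold pvPairLe pvPairLt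
  simp only [Prod.mk.injEq]
  omega

theorem pvPairLt_trichotomy (p q : Int × Int) : pvPairLt p q ∨ p = q ∨ pvPairLt q p := by
  obtain ⟨a, b⟩ := p; obtain ⟨c, d⟩ := q
  unfold pvPairLt
  simp only [Prod.mk.injEq]
  omega

-- the tuple key (rank[i], rank[i+k] if i+k<n else -1) compares exactly like the
-- length-2k truncated suffix
theorem pvPk_eq_iff {cs : List Char} {k : Int} {rank : List Int} (hg : pvGoodRank cs k rank)
    (hk : 1 ≤ k) {i j : Int} (hi0 : 0 ≤ i) (hi : i < (cs.length : Int)) (hj0 : 0 ≤ j)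
    (hj : j < (cs.length : Int)) :
    pvPk rank (cs.length : Int) k i = pvPk rank (cs.length : Int) k j ↔
      pvSufK cs (2 * k) i = pvSufK cs (2 * k) j := by
  have hdi := pvSufK_append cs (k := k) (i := i) (by omega) hi0
  have hdj := pvSufK_append cs (k := k) (i := j) (by omega) hj0
  constructor
  · intro h
    unfold pvPk at h
    rw [Prod.mk.injEq] at h
    obtain ⟨h1, h2⟩ := h
    have hAB : pvSufK cs k i = pvSufK cs k j := (pvGoodRank_eq_iff hg hi0 hi hj0 hj).mp h1
    rw [hdi, hdj, hAB]
    by_cases hik : i + k < (cs.length : Int) <;> by_cases hjk : j + k < (cs.length : Int)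
    · simp only [if_pos hik, if_pos hjk] at h2
      rw [(pvGoodRank_eq_iff hg (by omega) hik (by omega) hjk).mp h2]
    · simp only [if_pos hik, if_neg hjk] at h2
      exact absurd h2 (by have := hg.2.1 (i + k) (by omega) hik; omega)
    · simp only [if_neg hik, if_pos hjk] at h2
      exact absurd h2.symm (by have := hg.2.1 (j + k) (by omega) hjk; omega)
    · have hX : pvSufK cs k (i + k) = [] := pvSufK_nil_of_ge cs (by omega)
      have hY : pvSufK cs k (j + k) = [] := pvSufK_nil_of_ge cs (by omega)
      rw [hX, hY]
  · intro h
    have hlen := congrArg List.length h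
    rw [pvSufK_length, pvSufK_length] at hlen
    by_cases hbig : 2 * k ≤ (cs.length : Int) - i ∧ 2 * k ≤ (cs.length : Int) - j
    · -- both truncations are full: split the append
      have hlenA : (pvSufK cs k i).length = k.toNat := by rw [pvSufK_length]; omega
      have hlenB : (pvSufK cs k j).length = k.toNat := by rw [pvSufK_length]; omega
      rw [hdi, hdj] at h
      obtain ⟨hAB, hXY⟩ := List.append_inj h (by omega)
      have hik : i + k < (cs.length : Int) := by omega
      have hjk : j + k < (cs.length : Int) := by omega
      unfold pvPk
      rw [Prod.mk.injEq]
      refine ⟨(pvGoodRank_eq_iff hg hi0 hi hj0 hj).mpr hAB, ?_⟩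
      rw [if_pos hik, if_pos hjk]
      exact (pvGoodRank_eq_iff hg (by omega) hik (by omega) hjk).mpr hXY
    · -- at least one side is the whole suffix: then i = j
      have hij : i = j := by omega
      rw [hij]

theorem pvPk_lt_of {cs : List Char} {k : Int} {rank : List Int} (hg : pvGoodRank cs k rank)
    (hk : 1 ≤ k) {i j : Int} (hi0 : 0 ≤ i) (hi : i < (cs.length : Int)) (hj0 : 0 ≤ j)
    (hj : j < (cs.length : Int)) :
    pvPairLt (pvPk rank (cs.length : Int) k i) (pvPk rank (cs.length : Int) k j) →
      pvSufK cs (2 * k) i < pvSufK cs (2 * k) j := by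
  have hdi := pvSufK_append cs (k := k) (i := i) (by omega) hi0
  have hdj := pvSufK_append cs (k := k) (i := j) (by omega) hj0
  · intro h
    unfold pvPk pvPairLt at h
    rcases h with h1 | ⟨h1, h2⟩
    · -- first components differ: rank[i] < rank[j]
      simp only at h1
      have hAB : pvSufK cs k i < pvSufK cs k j := (pvGoodRank_lt_iff hg hi0 hi hj0 hj).mp h1
      rw [hdi, hdj]
      by_cases hp : pvSufK cs k i <+: pvSufK cs k j
      · have hne : pvSufK cs k i ≠ pvSufK cs k j := ne_of_lt hAB
        have hlt : (pvSufK cs k i).length < (pvSufK cs k j).length :=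
          lt_of_le_of_ne hp.length_le (fun hl => hne (List.IsPrefix.eq_of_length hp hl))
        have hlenB : (pvSufK cs k j).length ≤ k.toNat := by rw [pvSufK_length]; omega
        have hX : pvSufK cs k (i + k) = [] := by
          apply pvSufK_nil_of_ge
          have := pvSufK_length cs k i
          omega
        rw [hX, List.append_nil]
        exact pvLex_lt_append hAB
      · exact pvLex_lt_of_not_prefix hAB hp _ _
    · -- first components equal
      simp only at h1 h2
      have hAB : pvSufK cs k i = pvSufK cs k j := (pvGoodRank_eq_iff hg hi0 hi hj0 hj).mp h1
      rw [hdi, hdj, hAB]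
      by_cases hik : i + k < (cs.length : Int) <;> by_cases hjk : j + k < (cs.length : Int)
      · rw [if_pos hik, if_pos hjk] at h2
        exact pvLex_append_left_lt _ ((pvGoodRank_lt_iff hg (by omega) hik (by omega) hjk).mp h2)
      · rw [if_pos hik, if_neg hjk] at h2
        exact absurd h2 (by have := hg.2.1 (i + k) (by omega) hik; omega)
      · rw [if_neg hik, if_pos hjk] at h2
        apply pvLex_append_left_lt
        have hX : pvSufK cs k (i + k) = [] := pvSufK_nil_of_ge cs (by omega)
        rw [hX]
        exact pvLex_nil_lt (pvSufK_ne_nil cs hk (by omega) hjk)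
      · rw [if_neg hik, if_neg hjk] at h2
        omega

theorem pvPk_lt_iff {cs : List Char} {k : Int} {rank : List Int} (hg : pvGoodRank cs k rank)
    (hk : 1 ≤ k) {i j : Int} (hi0 : 0 ≤ i) (hi : i < (cs.length : Int)) (hj0 : 0 ≤ j)
    (hj : j < (cs.length : Int)) :
    pvPairLt (pvPk rank (cs.length : Int) k i) (pvPk rank (cs.length : Int) k j) ↔
      pvSufK cs (2 * k) i < pvSufK cs (2 * k) j := by
  constructor
  · exact pvPk_lt_of hg hk hi0 hi hj0 hj
  · intro h
    rcases pvPairLt_trichotomy (pvPk rank (cs.length : Int) k i) (pvPk rank (cs.length : Int) k j)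
      with h' | h' | h'
    · exact h'
    · rw [pvPk_eq_iff hg hk hi0 hi hj0 hj] at h'
      exact absurd h (by rw [h']; exact lt_irrefl _)
    · have := pvPk_lt_of hg hk hj0 hj hi0 hi h'
      exact absurd (lt_trans h this) (lt_irrefl _)

-- ---------- dense re-ranking pass ----------

theorem pvGetD_setD (xs : List Int) {i x : Int} (v : Int) (hi0 : 0 ≤ i) (hi : i < (xs.length : Int))
    (hx0 : 0 ≤ x) :
    PySem.List.pyGetD (PySem.List.pySetD xs i v) x 0 =
      if x = i then v else PySem.List.pyGetD xs x 0 := by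
  have hi' : i = ((i.toNat : Nat) : Int) := by omega
  have hx' : x = ((x.toNat : Nat) : Int) := by omega
  rw [hi', hx', PySem.List.pyGetD_pySetD_natCast xs i.toNat x.toNat v 0 (by omega)]
  by_cases h : x.toNat = i.toNat
  · rw [if_pos h, if_pos (by omega)]
  · rw [if_neg h, if_neg (by omega)]

-- the dense rank assigned to the t-th element of the sorted list
def pvD (pkf : Int → Int × Int) (s : List Int) : Nat → Int
  | 0 => 0
  | t + 1 => pvD pkf s t + (if pkf (s.getD (t + 1) 0) = pkf (s.getD t 0) then 0 else 1)

theorem pvD_succ (pkf : Int → Int × Int) (s : List Int) (t : Nat) :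
    pvD pkf s (t + 1) = pvD pkf s t +
      (if pkf (s.getD (t + 1) 0) = pkf (s.getD t 0) then 0 else 1) := rfl

theorem pvD_nonneg (pkf : Int → Int × Int) (s : List Int) (t : Nat) : 0 ≤ pvD pkf s t := by
  induction t with
  | zero => simp [pvD]
  | succ t ih => rw [pvD_succ]; split_ifs <;> omega

theorem pvD_mono (pkf : Int → Int × Int) (s : List Int) {t t' : Nat} (h : t ≤ t') :
    pvD pkf s t ≤ pvD pkf s t' := by
  induction t' with
  | zero => simp_all
  | succ t' ih =>
    rcases Nat.le_succ_iff.mp h with h' | h'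
    · have := ih h'
      rw [pvD_succ]
      split_ifs <;> omega
    · subst h'; exact le_refl _

theorem pvPk_chain {pkf : Int → Int × Int} {s : List Int}
    (hpw : s.Pairwise (fun a b => pvPairLe (pkf a) (pkf b)))
    {t t' : Nat} (h : t ≤ t') (ht' : t' < s.length) :
    pvPairLe (pkf (s.getD t 0)) (pkf (s.getD t' 0)) := by
  rcases Nat.lt_or_ge t t' with hlt | hge
  · have := List.pairwise_iff_getElem.mp hpw t t' (by omega) ht' hlt
    rwa [List.getD_eq_getElem s 0 (by omega), List.getD_eq_getElem s 0 ht']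
  · have : t = t' := by omega
    subst this
    exact (pvPairLe_iff_lt_or_eq _ _).mpr (Or.inr rfl)

theorem pvD_eq_iff {pkf : Int → Int × Int} {s : List Int}
    (hpw : s.Pairwise (fun a b => pvPairLe (pkf a) (pkf b)))
    {t t' : Nat} (h : t ≤ t') (ht' : t' < s.length) :
    (pvD pkf s t' = pvD pkf s t ↔ pkf (s.getD t' 0) = pkf (s.getD t 0)) := by
  induction t' with
  | zero =>
    have : t = 0 := by omega
    subst this; simp
  | succ t' ih =>
    rcases Nat.le_succ_iff.mp h with h' | h'
    · have hmono := pvD_mono pkf s h'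
      have hstep := pvD_succ pkf s t'
      constructor
      · intro hD
        rw [hstep] at hD
        have hd : pkf (s.getD (t' + 1) 0) = pkf (s.getD t' 0) := by
          by_contra hne
          rw [if_neg hne] at hD
          omega
        rw [if_pos hd] at hD
        rw [hd]
        exact (ih h' (by omega)).mp (by omega)
      · intro hpk
        have h1 : pvPairLe (pkf (s.getD t 0)) (pkf (s.getD t' 0)) := pvPk_chain hpw h' (by omega)
        have h2 : pvPairLe (pkf (s.getD t' 0)) (pkf (s.getD (t' + 1) 0)) :=
          pvPk_chain hpw (Nat.le_succ t') ht'
        rw [hpk] at h2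
        have heq1 : pkf (s.getD t' 0) = pkf (s.getD t 0) := pvPairLe_antisymm h2 h1
        have heq2 : pkf (s.getD (t' + 1) 0) = pkf (s.getD t' 0) := by rw [hpk, heq1]
        have hDt := (ih h' (by omega)).mpr heq1
        rw [hstep, if_pos heq2]
        omega
    · subst h'; simp

theorem pvD_le_iff {pkf : Int → Int × Int} {s : List Int}
    (hpw : s.Pairwise (fun a b => pvPairLe (pkf a) (pkf b)))
    {t t' : Nat} (ht : t < s.length) (ht' : t' < s.length) :
    (pvD pkf s t ≤ pvD pkf s t' ↔ pvPairLe (pkf (s.getD t 0)) (pkf (s.getD t' 0))) := by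
  rcases Nat.lt_or_ge t t' with h | h
  · exact iff_of_true (pvD_mono pkf s (le_of_lt h)) (pvPk_chain hpw (le_of_lt h) ht')
  · -- t' ≤ t
    have hm := pvD_mono pkf s h
    constructor
    · intro hle
      have heq := (pvD_eq_iff hpw h ht).mp (le_antisymm hle hm)
      rw [heq]
      exact (pvPairLe_iff_lt_or_eq _ _).mpr (Or.inr rfl)
    · intro hLe
      have h2 := pvPk_chain hpw h ht
      have heq := pvPairLe_antisymm hLe h2
      rw [(pvD_eq_iff hpw h ht).mpr heq]

theorem pvPk_le_iff {cs : List Char} {k : Int} {rank : List Int} (hg : pvGoodRank cs k rank)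
    (hk : 1 ≤ k) {i j : Int} (hi0 : 0 ≤ i) (hi : i < (cs.length : Int)) (hj0 : 0 ≤ j)
    (hj : j < (cs.length : Int)) :
    pvPairLe (pvPk rank (cs.length : Int) k i) (pvPk rank (cs.length : Int) k j) ↔
      pvSufK cs (2 * k) i ≤ pvSufK cs (2 * k) j := by
  rw [pvPairLe_iff_lt_or_eq, le_iff_lt_or_eq,
    pvPk_lt_iff hg hk hi0 hi hj0 hj, pvPk_eq_iff hg hk hi0 hi hj0 hj]

theorem pvDenseFold (pkf : Int → Int × Int) (s temp1 : List Int)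
    (hlen : temp1.length = s.length)
    (hnd : s.Nodup)
    (hmem : ∀ x ∈ s, 0 ≤ x ∧ x < (s.length : Int))
    (hzero : PySem.List.pyGetD temp1 (s.getD 0 0) 0 = 0)
    (m : Nat) (hm1 : 1 ≤ m) (hmn : m ≤ s.length) :
    ((PySem.List.pyRange 1 (m : Int) 1).foldl (fun t i =>
      if pkf (PySem.List.pyGetD s i 0) = pkf (PySem.List.pyGetD s (i - 1) 0) then
        PySem.List.pySetD t (PySem.List.pyGetD s i 0)
          (PySem.List.pyGetD t (PySem.List.pyGetD s (i - 1) 0) 0)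
      else
        PySem.List.pySetD t (PySem.List.pyGetD s i 0)
          (PySem.List.pyGetD t (PySem.List.pyGetD s (i - 1) 0) 0 + 1)) temp1).length = s.length ∧
    (∀ t : Nat, t < m →
      PySem.List.pyGetD ((PySem.List.pyRange 1 (m : Int) 1).foldl (fun t i =>
        if pkf (PySem.List.pyGetD s i 0) = pkf (PySem.List.pyGetD s (i - 1) 0) then
          PySem.List.pySetD t (PySem.List.pyGetD s i 0)
            (PySem.List.pyGetD t (PySem.List.pyGetD s (i - 1) 0) 0)
        else
          PySem.List.pySetD t (PySem.List.pyGetD s i 0)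
            (PySem.List.pyGetD t (PySem.List.pyGetD s (i - 1) 0) 0 + 1)) temp1)
        (s.getD t 0) 0 = pvD pkf s t) := by
  induction m with
  | zero => omega
  | succ m ih =>
    rcases Nat.eq_or_lt_of_le hm1 with hbase | hstep
    · -- m + 1 = 1 : empty range, only t = 0
      have hm0 : m = 0 := by omega
      subst hm0
      rw [show ((1 : Nat) : Int) = 1 by norm_num, PySem.List.pyRange_one_eq_nil (le_refl 1)]
      simp only [List.foldl_nil]
      refine ⟨hlen, ?_⟩
      intro t ht
      have : t = 0 := by omega
      subst this
      simpa [pvD] using hzero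
    · have hm1' : 1 ≤ m := by omega
      obtain ⟨ihlen, ihent⟩ := ih hm1' (by omega)
      have hsplit : PySem.List.pyRange 1 ((m + 1 : Nat) : Int) 1 =
          PySem.List.pyRange 1 (m : Int) 1 ++ [(m : Int)] := by
        rw [show ((m + 1 : Nat) : Int) = (m : Int) + 1 by omega]
        exact PySem.List.pyRange_one_succ_right (by omega)
      rw [hsplit, List.foldl_append]
      set F := (PySem.List.pyRange 1 (m : Int) 1).foldl (fun t i =>
        if pkf (PySem.List.pyGetD s i 0) = pkf (PySem.List.pyGetD s (i - 1) 0) then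
          PySem.List.pySetD t (PySem.List.pyGetD s i 0)
            (PySem.List.pyGetD t (PySem.List.pyGetD s (i - 1) 0) 0)
        else
          PySem.List.pySetD t (PySem.List.pyGetD s i 0)
            (PySem.List.pyGetD t (PySem.List.pyGetD s (i - 1) 0) 0 + 1)) temp1 with hF
      simp only [List.foldl_cons, List.foldl_nil]
      have hmlt : m < s.length := by omega
      have hcurr : PySem.List.pyGetD s ((m : Int)) 0 = s.getD m 0 := by
        rw [PySem.List.pyGetD_eq_getElem s 0 (by omega) (by exact_mod_cast hmlt),
          List.getD_eq_getElem s 0 hmlt]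
        simp
      have hprev : PySem.List.pyGetD s ((m : Int) - 1) 0 = s.getD (m - 1) 0 := by
        rw [show (m : Int) - 1 = ((m - 1 : Nat) : Int) by omega,
          PySem.List.pyGetD_eq_getElem s 0 (by omega) (by omega),
          List.getD_eq_getElem s 0 (by omega)]
        simp
      have hib := ihent (m - 1) (by omega)
      have hgm : s.getD m 0 ∈ s := by
        rw [List.getD_eq_getElem s 0 hmlt]; exact List.getElem_mem hmlt
      have hcurrmem := hmem (s.getD m 0) hgm
      have hvm := pvD_succ pkf s (m - 1)
      rw [show m - 1 + 1 = m by omega] at hvm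
      rw [hcurr, hprev]
      split_ifs with hcond
      · refine ⟨by rw [PySem.List.length_pySetD, ihlen], ?_⟩
        intro t ht
        have hgt : s.getD t 0 ∈ s := by
          rw [List.getD_eq_getElem s 0 (by omega)]
          exact List.getElem_mem _
        have htmem := hmem _ hgt
        rw [pvGetD_setD F _ hcurrmem.1 (by rw [ihlen]; exact hcurrmem.2) htmem.1]
        by_cases hteq : t = m
        · subst hteq
          rw [if_pos rfl, hib, hvm, if_pos hcond]
          omega
        · have hne : s.getD t 0 ≠ s.getD m 0 := by
            intro he
            apply hteq
            rw [List.getD_eq_getElem s 0 (by omega), List.getD_eq_getElem s 0 hmlt] at he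
            exact hnd.getElem_inj_iff.mp he
          rw [if_neg hne]
          exact ihent t (by omega)
      · refine ⟨by rw [PySem.List.length_pySetD, ihlen], ?_⟩
        intro t ht
        have hgt : s.getD t 0 ∈ s := by
          rw [List.getD_eq_getElem s 0 (by omega)]
          exact List.getElem_mem _
        have htmem := hmem _ hgt
        rw [pvGetD_setD F _ hcurrmem.1 (by rw [ihlen]; exact hcurrmem.2) htmem.1]
        by_cases hteq : t = m
        · subst hteq
          rw [if_pos rfl, hib, hvm, if_neg hcond]
        · have hne : s.getD t 0 ≠ s.getD m 0 := by
            intro he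
            apply hteq
            rw [List.getD_eq_getElem s 0 (by omega), List.getD_eq_getElem s 0 hmlt] at he
            exact hnd.getElem_inj_iff.mp he
          rw [if_neg hne]
          exact ihent t (by omega)

theorem pvRankUpdate_good {cs : List Char} {k : Int} {rank : List Int} (hg : pvGoodRank cs k rank)
    (hk : 1 ≤ k) {s : List Int} (hperm : s.Perm (PySem.List.pyRange 0 (cs.length : Int) 1))
    (hpw : s.Pairwise (fun a b =>
      pvPairLe (pvPk rank (cs.length : Int) k a) (pvPk rank (cs.length : Int) k b)))
    {temp0 : List Int} (hlen : temp0.length = cs.length) (hn : 1 ≤ cs.length) :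
    pvGoodRank cs (2 * k) (pvRankUpdate rank (cs.length : Int) k s temp0) := by
  have hslen : s.length = cs.length := by
    rw [hperm.length_eq, PySem.List.length_pyRange_one]; omega
  have hnd : s.Nodup := hperm.symm.nodup (PySem.List.nodup_pyRange_one 0 (cs.length : Int))
  have hmem : ∀ x ∈ s, 0 ≤ x ∧ x < (s.length : Int) := by
    intro x hx
    have := PySem.List.mem_pyRange_one.mp (hperm.mem_iff.mp hx)
    omega
  -- rewrite the update pass into the abstract dense-rank fold
  have hrw : pvRankUpdate rank (cs.length : Int) k s temp0 =
      (PySem.List.pyRange 1 ((s.length : Nat) : Int) 1).foldl (fun t i =>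
        if pvPk rank (cs.length : Int) k (PySem.List.pyGetD s i 0) =
            pvPk rank (cs.length : Int) k (PySem.List.pyGetD s (i - 1) 0) then
          PySem.List.pySetD t (PySem.List.pyGetD s i 0)
            (PySem.List.pyGetD t (PySem.List.pyGetD s (i - 1) 0) 0)
        else
          PySem.List.pySetD t (PySem.List.pyGetD s i 0)
            (PySem.List.pyGetD t (PySem.List.pyGetD s (i - 1) 0) 0 + 1))
        (PySem.List.pySetD temp0 (PySem.List.pyGetD s 0 0) 0) := by
    unfold pvRankUpdate
    rw [hslen]
    show List.foldl _ _ _ = List.foldl _ _ _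
    apply PySem.List.foldl_congr_mem
    intro acc x _
    simp only [pvPk, Prod.mk.injEq]
  have hs0 : PySem.List.pyGetD s 0 0 = s.getD 0 0 := by
    rw [PySem.List.pyGetD_eq_getElem s 0 (by omega) (by exact_mod_cast (by omega : 0 < s.length)),
      List.getD_eq_getElem s 0 (by omega)]
    simp
  have hg0mem : s.getD 0 0 ∈ s := by
    rw [List.getD_eq_getElem s 0 (by omega)]
    exact List.getElem_mem _
  have h0b := hmem _ hg0mem
  have hzero : PySem.List.pyGetD (PySem.List.pySetD temp0 (PySem.List.pyGetD s 0 0) 0)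
      (s.getD 0 0) 0 = 0 := by
    rw [hs0, pvGetD_setD temp0 0 h0b.1 (by rw [hlen, ← hslen]; exact h0b.2) h0b.1, if_pos rfl]
  obtain ⟨hFlen, hFent⟩ := pvDenseFold (pvPk rank (cs.length : Int) k) s
    (PySem.List.pySetD temp0 (PySem.List.pyGetD s 0 0) 0)
    (by rw [PySem.List.length_pySetD, hlen, hslen]) hnd hmem hzero s.length (by omega) (le_refl _)
  rw [hrw]
  set F := (PySem.List.pyRange 1 ((s.length : Nat) : Int) 1).foldl (fun t i =>
        if pvPk rank (cs.length : Int) k (PySem.List.pyGetD s i 0) =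
            pvPk rank (cs.length : Int) k (PySem.List.pyGetD s (i - 1) 0) then
          PySem.List.pySetD t (PySem.List.pyGetD s i 0)
            (PySem.List.pyGetD t (PySem.List.pyGetD s (i - 1) 0) 0)
        else
          PySem.List.pySetD t (PySem.List.pyGetD s i 0)
            (PySem.List.pyGetD t (PySem.List.pyGetD s (i - 1) 0) 0 + 1))
        (PySem.List.pySetD temp0 (PySem.List.pyGetD s 0 0) 0) with hF
  have hidx : ∀ x : Int, 0 ≤ x → x < (cs.length : Int) →
      ∃ t : Nat, t < s.length ∧ s.getD t 0 = x := by
    intro x hx0 hx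
    have hxs : x ∈ s := hperm.mem_iff.mpr (PySem.List.mem_pyRange_one.mpr ⟨hx0, hx⟩)
    obtain ⟨t, ht, hxe⟩ := List.mem_iff_getElem.mp hxs
    exact ⟨t, ht, by rw [List.getD_eq_getElem s 0 ht]; exact hxe⟩
  refine ⟨by rw [hFlen, hslen], ?_, ?_⟩
  · intro i hi0 hi
    obtain ⟨t, ht, hte⟩ := hidx i hi0 hi
    rw [← hte, hFent t ht]
    exact pvD_nonneg _ s t
  · intro i j hi0 hi hj0 hj
    obtain ⟨t, ht, hte⟩ := hidx i hi0 hi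
    obtain ⟨t', ht', hte'⟩ := hidx j hj0 hj
    rw [← hte, ← hte', hFent t ht, hFent t' ht',
      pvD_le_iff hpw ht ht', hte, hte']
    exact pvPk_le_iff hg hk hi0 hi hj0 hj

-- ---------- the doubling loop produces the sorted suffix permutation ----------

theorem pvSufK_one (cs : List Char) {i : Int} (hi0 : 0 ≤ i) (hi : i < (cs.length : Int)) :
    pvSufK cs 1 i = [cs[i.toNat]'(by omega)] := by
  have h1 : List.drop i.toNat cs = cs[i.toNat]'(by omega) :: List.drop (i.toNat + 1) cs :=
    List.drop_eq_getElem_cons (by omega)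
  unfold pvSufK
  rw [h1]
  rfl

theorem pvLex_singleton_le (a b : Char) : ([a] : List Char) ≤ [b] ↔ a ≤ b := by
  constructor
  · intro h
    by_contra hab
    have hlt : b < a := lt_of_not_ge hab
    have : ([b] : List Char) < [a] := List.cons_lt_cons_iff.mpr (Or.inl hlt)
    exact absurd this (not_lt.mpr h)
  · intro h
    rcases lt_or_eq_of_le h with h' | h'
    · exact le_of_lt (List.cons_lt_cons_iff.mpr (Or.inl h'))
    · subst h'; exact le_refl _

theorem pvGoodRank_init (cs : List Char) :
    pvGoodRank cs 1 (cs.map (fun c => (c.toNat : Int))) := by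
  refine ⟨by simp, ?_, ?_⟩
  · intro i hi0 hi
    rw [PySem.List.pyGetD_eq_getElem _ 0 hi0 (by simpa using hi)]
    simp
  · intro i j hi0 hi hj0 hj
    rw [PySem.List.pyGetD_eq_getElem _ 0 hi0 (by simpa using hi),
      PySem.List.pyGetD_eq_getElem _ 0 hj0 (by simpa using hj),
      pvSufK_one cs hi0 hi, pvSufK_one cs hj0 hj, pvLex_singleton_le]
    simp only [List.getElem_map]
    constructor
    · intro h
      have : (cs[i.toNat]'(by omega)).toNat ≤ (cs[j.toNat]'(by omega)).toNat := by exact_mod_cast h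
      exact this
    · intro h
      exact_mod_cast (show (cs[i.toNat]'(by omega)).toNat ≤ (cs[j.toNat]'(by omega)).toNat from h)

theorem pvSaLoop_spec (cs : List Char) (m : Nat) :
    ∀ (suffixes rank temp : List Int) (k : Int) (hk : 0 < k),
      m = (((cs.length : Int)) - k).toNat →
      pvGoodRank cs k rank →
      suffixes.Perm (PySem.List.pyRange 0 (cs.length : Int) 1) →
      temp.length = cs.length →
      ((cs.length : Int) ≤ k →
        suffixes.Pairwise (fun i j => pvSufx cs i < pvSufx cs j)) →
      (pvSaLoop (cs.length : Int) suffixes rank temp k hk).Perm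
          (PySem.List.pyRange 0 (cs.length : Int) 1) ∧
        (pvSaLoop (cs.length : Int) suffixes rank temp k hk).Pairwise
          (fun i j => pvSufx cs i < pvSufx cs j) := by
  induction m using Nat.strong_induction_on with
  | _ m ih =>
    intro suffixes rank temp k hk hm hg hperm htlen hsorted
    rw [pvSaLoop]
    by_cases hlt : k < (cs.length : Int)
    · rw [dif_pos hlt]
      have hn1 : 1 ≤ cs.length := by omega
      set s' := PySem.List.sorted2 suffixes
          (fun i => PySem.List.pyGetD rank i 0)
          (fun i => if i + k < (cs.length : Int) then PySem.List.pyGetD rank (i + k) 0 else -1)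
          false with hs'
      have hperm' : s'.Perm (PySem.List.pyRange 0 (cs.length : Int) 1) :=
        (PySem.List.sorted2_perm suffixes _ _ false).trans hperm
      have hnd' : s'.Nodup := hperm'.symm.nodup (PySem.List.nodup_pyRange_one 0 (cs.length : Int))
      have hmem' : ∀ x ∈ s', 0 ≤ x ∧ x < (cs.length : Int) := by
        intro x hx
        have := PySem.List.mem_pyRange_one.mp (hperm'.mem_iff.mp hx)
        omega
      have hpw : s'.Pairwise (fun a b =>
          pvPairLe (pvPk rank (cs.length : Int) k a) (pvPk rank (cs.length : Int) k b)) := by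
        have := pvSorted2_pairwise suffixes
          (fun i => PySem.List.pyGetD rank i 0)
          (fun i => if i + k < (cs.length : Int) then PySem.List.pyGetD rank (i + k) 0 else -1)
        exact this.imp_of_mem (by intro a b _ _ h; exact h)
      have hgood' : pvGoodRank cs (2 * k) (pvRankUpdate rank (cs.length : Int) k s' temp) :=
        pvRankUpdate_good hg (by omega) hperm' hpw htlen hn1
      have hsorted' : (cs.length : Int) ≤ 2 * k →
          s'.Pairwise (fun i j => pvSufx cs i < pvSufx cs j) := by
        intro h2k
        have hpw2 := hpw.and (List.Pairwise.imp_of_mem (l := s')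
          (S := fun a b => a ≠ b) (by
            intro a b ha hb h
            exact h) (List.Pairwise.imp_of_mem (by intro a b _ _ h; exact h) hnd'))
        refine hpw2.imp_of_mem ?_
        intro a b ha hb hab
        obtain ⟨hLe, hne⟩ := hab
        have hba := hmem' a ha
        have hbb := hmem' b hb
        have hle2 : pvSufK cs (2 * k) a ≤ pvSufK cs (2 * k) b :=
          (pvPk_le_iff hg (by omega) hba.1 hba.2 hbb.1 hbb.2).mp hLe
        rw [pvSufK_eq_sufx cs (by omega) hba.1, pvSufK_eq_sufx cs (by omega) hbb.1] at hle2
        rcases lt_or_eq_of_le hle2 with h' | h'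
        · exact h'
        · have := pvSufx_inj cs (by omega) (by omega) h'
          exact absurd (by omega : a = b) hne
      exact ih (((cs.length : Int) - 2 * k).toNat) (by omega) s'
        (pvRankUpdate rank (cs.length : Int) k s' temp)
        (pvRankUpdate rank (cs.length : Int) k s' temp) (2 * k) (by omega) rfl hgood'
        hperm' hgood'.1 hsorted'
    · rw [dif_neg hlt]
      exact ⟨hperm, hsorted (by omega)⟩

theorem pvBuildSA_spec (cs : List Char) :
    (pvBuildSuffixArray cs).Perm (PySem.List.pyRange 0 (cs.length : Int) 1) ∧
      (pvBuildSuffixArray cs).Pairwise (fun i j => pvSufx cs i < pvSufx cs j) := by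
  unfold pvBuildSuffixArray
  apply pvSaLoop_spec cs (((cs.length : Int)) - 1).toNat _ _ _ 1 _ rfl (pvGoodRank_init cs)
    (List.Perm.refl _) (by simp)
  intro h1
  rw [List.pairwise_iff_getElem]
  intro a b ha hb hab
  rw [PySem.List.length_pyRange_one] at ha hb
  omega

-- ---------- longest common prefix ----------

def pvLcpN (a b : List Char) : Nat :=
  match a, b with
  | x :: a', y :: b' => if x = y then pvLcpN a' b' + 1 else 0
  | _, _ => 0

theorem pvLcpB_eq (a b : List Char) : pvLcpB a b = (pvLcpN a b : Int) := by
  induction a generalizing b with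
  | nil => cases b <;> simp [pvLcpB, pvLcpN]
  | cons x a' ih =>
    cases b with
    | nil => simp [pvLcpB, pvLcpN]
    | cons y b' =>
      by_cases h : x = y
      · simp [pvLcpB, pvLcpN, h, ih]
        omega
      · simp [pvLcpB, pvLcpN, h]

theorem pvLcpN_comm (a b : List Char) : pvLcpN a b = pvLcpN b a := by
  induction a generalizing b with
  | nil => cases b <;> simp [pvLcpN]
  | cons x a' ih =>
    cases b with
    | nil => simp [pvLcpN]
    | cons y b' =>
      by_cases h : x = y
      · subst h; simp [pvLcpN, ih]
      · have h2 : ¬ y = x := fun hh => h hh.symm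
        simp [pvLcpN, h, h2]

theorem pvLcpN_le_left (a b : List Char) : pvLcpN a b ≤ a.length := by
  induction a generalizing b with
  | nil => simp [pvLcpN]
  | cons x a' ih =>
    cases b with
    | nil => simp [pvLcpN]
    | cons y b' =>
      by_cases h : x = y <;> simp [pvLcpN, h]
      exact ih b'

theorem pvLcpN_le_right (a b : List Char) : pvLcpN a b ≤ b.length := by
  rw [pvLcpN_comm]; exact pvLcpN_le_left b a

theorem pvLcpN_cons_pos {a b : List Char} (h : 0 < pvLcpN a b) :
    ∃ (c : Char) (a' b' : List Char), a = c :: a' ∧ b = c :: b' ∧ pvLcpN a b = pvLcpN a' b' + 1 := by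
  match a, b with
  | [], _ => simp [pvLcpN] at h
  | x :: a', [] => simp [pvLcpN] at h
  | x :: a', y :: b' =>
    by_cases hxy : x = y
    · subst hxy
      exact ⟨x, a', b', rfl, rfl, by simp [pvLcpN]⟩
    · simp [pvLcpN, hxy] at h

theorem pvLcpN_cons (c : Char) (a b : List Char) :
    pvLcpN (c :: a) (c :: b) = pvLcpN a b + 1 := by simp [pvLcpN]

theorem pvLcpN_ne (a b : List Char) (ha : pvLcpN a b < a.length) (hb : pvLcpN a b < b.length) :
    a[pvLcpN a b]'ha ≠ b[pvLcpN a b]'hb := by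
  induction a generalizing b with
  | nil => simp at ha
  | cons x a' ih =>
    cases b with
    | nil => simp at hb
    | cons y b' =>
      by_cases h : x = y
      · subst h
        have hc := pvLcpN_cons x a' b'
        intro heq
        simp only [hc, List.getElem_cons_succ] at heq
        have ha' : pvLcpN a' b' < a'.length := by simp [hc] at ha; omega
        have hb' : pvLcpN a' b' < b'.length := by simp [hc] at hb; omega
        exact ih b' ha' hb' heq
      · simp [pvLcpN, h]

theorem pvLcpN_getElem {a b : List Char} {t : Nat} (ht : t < pvLcpN a b) :
    a[t]'(by have := pvLcpN_le_left a b; omega) = b[t]'(by have := pvLcpN_le_right a b; omega) := by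
  induction a generalizing b t with
  | nil => simp [pvLcpN] at ht
  | cons x a' ih =>
    cases b with
    | nil => simp [pvLcpN] at ht
    | cons y b' =>
      by_cases h : x = y
      · subst h
        cases t with
        | zero => simp
        | succ t =>
          rw [pvLcpN_cons] at ht
          simpa using ih (b := b') (by omega)
      · simp [pvLcpN, h] at ht

theorem pvLex_head_le {u v : Char} {us vs : List Char} (h : (u :: us : List Char) ≤ v :: vs) :
    u ≤ v := by
  rcases lt_or_eq_of_le h with h' | h'
  · rcases List.cons_lt_cons_iff.mp h' with h1 | ⟨h1, _⟩
    · exact le_of_lt h1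
    · exact le_of_eq h1
  · exact le_of_eq (List.cons.inj h').1

-- a ≤ b ≤ c implies the common prefix of a and c is a prefix of b
theorem pvLcpMid {a b c : List Char} (hab : a ≤ b) (hbc : b ≤ c) :
    pvLcpN a c ≤ pvLcpN b c := by
  induction a generalizing b c with
  | nil => simp [pvLcpN]
  | cons x a' ih =>
    cases c with
    | nil => cases a' <;> simp [pvLcpN]
    | cons z c' =>
      by_cases hxz : x = z
      · subst hxz
        -- a = x :: a', c = x :: c' : b must be x :: b'
        cases b with
        | nil =>
          exact absurd hab (by
            intro hle
            exact absurd (lt_of_lt_of_le (pvLex_nil_lt (by simp)) hle) (lt_irrefl _))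
        | cons y b' =>
          have hxy : x = y := le_antisymm (pvLex_head_le hab) (pvLex_head_le hbc)
          subst hxy
          rw [pvLcpN_cons]
          have hab' : a' ≤ b' := by
            rcases lt_or_eq_of_le hab with h' | h'
            · rcases List.cons_lt_cons_iff.mp h' with h1 | ⟨_, h2⟩
              · exact absurd h1 (lt_irrefl _)
              · exact le_of_lt h2
            · exact le_of_eq (List.cons.inj h').2
          have hbc' : b' ≤ c' := by
            rcases lt_or_eq_of_le hbc with h' | h'
            · rcases List.cons_lt_cons_iff.mp h' with h1 | ⟨_, h2⟩
              · exact absurd h1 (lt_irrefl _)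
              · exact le_of_lt h2
            · exact le_of_eq (List.cons.inj h').2
          rw [pvLcpN_cons]
          have := ih hab' hbc'
          omega
      · simp [pvLcpN, hxz]

-- ---------- Kasai's algorithm ----------

theorem pvLcpN_nil_right (a : List Char) : pvLcpN a [] = 0 := by cases a <;> simp [pvLcpN]

theorem pvSufx_nil (cs : List Char) {i : Int} (h : (cs.length : Int) ≤ i) : pvSufx cs i = [] := by
  unfold pvSufx
  exact List.drop_eq_nil_of_le (by omega)

theorem pvSufx_cons (cs : List Char) {i : Int} (hi0 : 0 ≤ i) (hi : i < (cs.length : Int)) :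
    pvSufx cs i = cs[i.toNat]'(by omega) :: pvSufx cs (i + 1) := by
  unfold pvSufx
  rw [show (i + 1).toNat = i.toNat + 1 by omega]
  exact List.drop_eq_getElem_cons (by omega)

-- one-character shift of a strict comparison with positive common prefix
theorem pvShift (cs : List Char) {p i : Int} (hp0 : 0 ≤ p) (hp : p < (cs.length : Int))
    (hi0 : 0 ≤ i) (hi : i < (cs.length : Int))
    (hlt : pvSufx cs p < pvSufx cs i) (hL : 1 ≤ pvLcpN (pvSufx cs i) (pvSufx cs p)) :
    pvSufx cs (p + 1) < pvSufx cs (i + 1) ∧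
      pvLcpN (pvSufx cs (i + 1)) (pvSufx cs (p + 1)) + 1 = pvLcpN (pvSufx cs i) (pvSufx cs p) := by
  obtain ⟨c, a', b', ha, hb, hrec⟩ := pvLcpN_cons_pos (a := pvSufx cs i) (b := pvSufx cs p) (by omega)
  have hci : pvSufx cs i = cs[i.toNat]'(by omega) :: pvSufx cs (i + 1) := pvSufx_cons cs hi0 hi
  have hcp : pvSufx cs p = cs[p.toNat]'(by omega) :: pvSufx cs (p + 1) := pvSufx_cons cs hp0 hp
  rw [hci] at ha
  rw [hcp] at hb
  obtain ⟨hc1, ha'⟩ := List.cons.inj ha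
  obtain ⟨hc2, hb'⟩ := List.cons.inj hb
  constructor
  · rw [hci, hcp, hc1, hc2] at hlt
    rcases List.cons_lt_cons_iff.mp hlt with h1 | ⟨_, h2⟩
    · exact absurd h1 (lt_irrefl _)
    · exact h2
  · rw [ha', hb', hrec]

-- the common prefix with any lexicographically smaller suffix is bounded by the
-- common prefix with the sorted predecessor
def pvTrueL (cs : List Char) (sa : List Int) (r : Nat) : Nat :=
  pvLcpN (pvSufx cs (sa.getD r 0)) (pvSufx cs (sa.getD (r - 1) 0))

theorem pvPredMax (cs : List Char) (sa : List Int)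
    (hperm : sa.Perm (PySem.List.pyRange 0 (cs.length : Int) 1))
    (hpair : sa.Pairwise (fun i j => pvSufx cs i < pvSufx cs j))
    {r : Nat} (hr1 : 1 ≤ r) (hr : r < sa.length) {q : Int} (hq0 : 0 ≤ q)
    (hqn : q ≤ (cs.length : Int)) (hqlt : pvSufx cs q < pvSufx cs (sa.getD r 0)) :
    pvLcpN (pvSufx cs (sa.getD r 0)) (pvSufx cs q) ≤ pvTrueL cs sa r := by
  rcases eq_or_lt_of_le hqn with hq | hq
  · have hq' : pvSufx cs q = [] := pvSufx_nil cs (by omega)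
    rw [hq', pvLcpN_nil_right]
    omega
  · -- q is an index of some suffix in sa
    have hqmem : q ∈ sa := hperm.mem_iff.mpr (PySem.List.mem_pyRange_one.mpr ⟨hq0, hq⟩)
    obtain ⟨t, ht, hte⟩ := List.mem_iff_getElem.mp hqmem
    have htd : sa.getD t 0 = q := by rw [List.getD_eq_getElem sa 0 ht]; exact hte
    have hstrict : ∀ a b : Nat, a < b → b < sa.length →
        pvSufx cs (sa.getD a 0) < pvSufx cs (sa.getD b 0) := by
      intro a b hab hb
      have := List.pairwise_iff_getElem.mp hpair a b (by omega) hb hab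
      rwa [List.getD_eq_getElem sa 0 (by omega), List.getD_eq_getElem sa 0 hb]
    have htr : t < r := by
      rcases Nat.lt_trichotomy t r with h | h | h
      · exact h
      · subst h
        rw [htd] at hqlt
        exact absurd hqlt (lt_irrefl _)
      · have := hstrict r t h ht
        rw [htd] at this
        exact absurd (lt_trans hqlt this) (lt_irrefl _)
    have hmid : pvSufx cs q ≤ pvSufx cs (sa.getD (r - 1) 0) := by
      rcases Nat.lt_or_ge t (r - 1) with h | h
      · exact le_of_lt (htd ▸ hstrict t (r - 1) h (by omega))
      · have : t = r - 1 := by omega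
        subst this
        rw [htd]
    have hmid2 : pvSufx cs (sa.getD (r - 1) 0) ≤ pvSufx cs (sa.getD r 0) :=
      le_of_lt (hstrict (r - 1) r (by omega) hr)
    have := pvLcpMid hmid hmid2
    unfold pvTrueL
    rw [pvLcpN_comm (pvSufx cs (sa.getD r 0)) (pvSufx cs q),
      pvLcpN_comm (pvSufx cs (sa.getD r 0)) (pvSufx cs (sa.getD (r - 1) 0))]
    exact this

theorem pvKey1 (cs : List Char) (sa : List Int)
    (hperm : sa.Perm (PySem.List.pyRange 0 (cs.length : Int) 1))
    (hpair : sa.Pairwise (fun i j => pvSufx cs i < pvSufx cs j))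
    {r r' : Nat} (hr1 : 1 ≤ r) (hr : r < sa.length) (hr'1 : 1 ≤ r') (hr' : r' < sa.length)
    (hnext : sa.getD r 0 + 1 = sa.getD r' 0) (hLpos : 1 ≤ pvTrueL cs sa r) :
    pvTrueL cs sa r - 1 ≤ pvTrueL cs sa r' := by
  have hlen : sa.length = cs.length := by
    rw [hperm.length_eq, PySem.List.length_pyRange_one]; omega
  have hval : ∀ t : Nat, t < sa.length → 0 ≤ sa.getD t 0 ∧ sa.getD t 0 < (cs.length : Int) := by
    intro t ht
    have : sa.getD t 0 ∈ sa := by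
      rw [List.getD_eq_getElem sa 0 ht]; exact List.getElem_mem ht
    have := PySem.List.mem_pyRange_one.mp (hperm.mem_iff.mp this)
    omega
  have hstrict : ∀ a b : Nat, a < b → b < sa.length →
      pvSufx cs (sa.getD a 0) < pvSufx cs (sa.getD b 0) := by
    intro a b hab hb
    have := List.pairwise_iff_getElem.mp hpair a b (by omega) hb hab
    rwa [List.getD_eq_getElem sa 0 (by omega), List.getD_eq_getElem sa 0 hb]
  have hp := hval (r - 1) (by omega)
  have hi := hval r hr
  have hlt := hstrict (r - 1) r (by omega) hr
  obtain ⟨hsh1, hsh2⟩ := pvShift cs hp.1 hp.2 hi.1 hi.2 hlt hLpos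
  have e1 : pvSufx cs (sa.getD r' 0) = pvSufx cs (sa.getD r 0 + 1) := by rw [← hnext]
  have hpm := pvPredMax cs sa hperm hpair hr'1 hr' (q := sa.getD (r - 1) 0 + 1)
    (by omega) (by omega) (by rw [e1]; exact hsh1)
  rw [e1] at hpm
  have hTr : pvTrueL cs sa r = pvLcpN (pvSufx cs (sa.getD r 0)) (pvSufx cs (sa.getD (r - 1) 0)) :=
    rfl
  omega

theorem pvKey2 (cs : List Char) (sa : List Int)
    (hperm : sa.Perm (PySem.List.pyRange 0 (cs.length : Int) 1))
    (hpair : sa.Pairwise (fun i j => pvSufx cs i < pvSufx cs j))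
    {r : Nat} (hr1 : 1 ≤ r) (hr : r < sa.length)
    (hnext : sa.getD r 0 + 1 = sa.getD 0 0) :
    pvTrueL cs sa r ≤ 1 := by
  by_contra hL
  have hTr : pvTrueL cs sa r = pvLcpN (pvSufx cs (sa.getD r 0)) (pvSufx cs (sa.getD (r - 1) 0)) :=
    rfl
  have hlen : sa.length = cs.length := by
    rw [hperm.length_eq, PySem.List.length_pyRange_one]; omega
  have hval : ∀ t : Nat, t < sa.length → 0 ≤ sa.getD t 0 ∧ sa.getD t 0 < (cs.length : Int) := by
    intro t ht
    have : sa.getD t 0 ∈ sa := by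
      rw [List.getD_eq_getElem sa 0 ht]; exact List.getElem_mem ht
    have := PySem.List.mem_pyRange_one.mp (hperm.mem_iff.mp this)
    omega
  have hstrict : ∀ a b : Nat, a < b → b < sa.length →
      pvSufx cs (sa.getD a 0) < pvSufx cs (sa.getD b 0) := by
    intro a b hab hb
    have := List.pairwise_iff_getElem.mp hpair a b (by omega) hb hab
    rwa [List.getD_eq_getElem sa 0 (by omega), List.getD_eq_getElem sa 0 hb]
  have hp := hval (r - 1) (by omega)
  have hi := hval r hr
  have hlt := hstrict (r - 1) r (by omega) hr
  obtain ⟨hsh1, hsh2⟩ := pvShift cs hp.1 hp.2 hi.1 hi.2 hlt (by omega)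
  set p := sa.getD (r - 1) 0 with hpdef
  set i := sa.getD r 0 with hidef
  have hlcp' : 1 ≤ pvLcpN (pvSufx cs (i + 1)) (pvSufx cs (p + 1)) := by omega
  have hpn : p + 1 < (cs.length : Int) := by
    by_contra hc
    have hnil : pvSufx cs (p + 1) = [] := pvSufx_nil cs (by omega)
    rw [hnil, pvLcpN_nil_right] at hlcp'
    omega
  have hpmem : p + 1 ∈ sa := hperm.mem_iff.mpr (PySem.List.mem_pyRange_one.mpr ⟨by omega, hpn⟩)
  obtain ⟨t, ht, hte⟩ := List.mem_iff_getElem.mp hpmem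
  have htd : sa.getD t 0 = p + 1 := by rw [List.getD_eq_getElem sa 0 ht]; exact hte
  rcases Nat.eq_zero_or_pos t with ht0 | ht0
  · subst ht0
    rw [htd] at hnext
    have hpi : p = i := by omega
    rw [hpi] at hlt
    exact absurd hlt (lt_irrefl _)
  · have := hstrict 0 t ht0 ht
    rw [htd, ← hnext] at this
    exact absurd (lt_trans hsh1 this) (lt_irrefl _)

-- the character-extension loop computes the longest common prefix exactly
theorem pvKasaiExtend_spec (cs : List Char) {i j h : Int} (hi0 : 0 ≤ i) (hj0 : 0 ≤ j)
    (h0 : 0 ≤ h)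
    (hle : h.toNat ≤ pvLcpN (pvSufx cs i) (pvSufx cs j)) :
    pvKasaiExtend cs (cs.length : Int) i j h = (pvLcpN (pvSufx cs i) (pvSufx cs j) : Int) := by
  set L := pvLcpN (pvSufx cs i) (pvSufx cs j) with hLdef
  have hgen : ∀ (m : Nat) (h : Int), 0 ≤ h → h.toNat ≤ L → m = L - h.toNat →
      pvKasaiExtend cs (cs.length : Int) i j h = (L : Int) := by
    intro m
    induction m with
    | zero =>
      intro h h0 hle hm
      have hht : h.toNat = L := by omega
      rw [pvKasaiExtend]
      have hLa := pvLcpN_le_left (pvSufx cs i) (pvSufx cs j)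
      have hLb := pvLcpN_le_right (pvSufx cs i) (pvSufx cs j)
      rw [pvSufx_length] at hLa hLb
      have hcond : ¬ (i + h < (cs.length : Int) ∧ j + h < (cs.length : Int) ∧
          PySem.List.pyGetD cs (i + h) ' ' = PySem.List.pyGetD cs (j + h) ' ') := by
        rintro ⟨hin, hjn, hch⟩
        have hia : L < (pvSufx cs i).length := by rw [pvSufx_length]; omega
        have hjb : L < (pvSufx cs j).length := by rw [pvSufx_length]; omega
        apply pvLcpN_ne (pvSufx cs i) (pvSufx cs j) hia hjb
        show (pvSufx cs i)[L] = (pvSufx cs j)[L]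
        unfold pvSufx
        rw [List.getElem_drop, List.getElem_drop]
        rw [PySem.List.pyGetD_eq_getElem cs ' ' (by omega) (by omega),
          PySem.List.pyGetD_eq_getElem cs ' ' (by omega) (by omega)] at hch
        have e1 : (i + h).toNat = i.toNat + L := by omega
        have e2 : (j + h).toNat = j.toNat + L := by omega
        simp only [e1, e2] at hch
        exact hch
      rw [dif_neg hcond]
      omega
    | succ m ih =>
      intro h h0 hle hm
      have hht : h.toNat < L := by omega
      rw [pvKasaiExtend]
      have hLa := pvLcpN_le_left (pvSufx cs i) (pvSufx cs j)
      have hLb := pvLcpN_le_right (pvSufx cs i) (pvSufx cs j)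
      rw [pvSufx_length] at hLa hLb
      have hch := pvLcpN_getElem (a := pvSufx cs i) (b := pvSufx cs j) (t := h.toNat)
        (by omega)
      have hcond : i + h < (cs.length : Int) ∧ j + h < (cs.length : Int) ∧
          PySem.List.pyGetD cs (i + h) ' ' = PySem.List.pyGetD cs (j + h) ' ' := by
        refine ⟨by omega, by omega, ?_⟩
        unfold pvSufx at hch
        rw [List.getElem_drop, List.getElem_drop] at hch
        rw [PySem.List.pyGetD_eq_getElem cs ' ' (by omega) (by omega),
          PySem.List.pyGetD_eq_getElem cs ' ' (by omega) (by omega)]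
        have e1 : (i + h).toNat = i.toNat + h.toNat := by omega
        have e2 : (j + h).toNat = j.toNat + h.toNat := by omega
        simp only [e1, e2]
        exact hch
      rw [dif_pos hcond]
      exact ih (h + 1) (by omega) (by omega) (by omega)
  exact hgen (L - h.toNat) h h0 hle rfl

theorem pvGetD_replicate {x : Int} (n : Nat) (hx0 : 0 ≤ x) (hx : x < (n : Int)) :
    PySem.List.pyGetD (List.replicate n (0 : Int)) x 0 = 0 := by
  rw [PySem.List.pyGetD_eq_getElem _ 0 hx0 (by simpa using hx)]
  simp

-- the inverse-permutation array built by kasai_lcp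
theorem pvKasaiRank_spec (cs : List Char) (sa : List Int)
    (hperm : sa.Perm (PySem.List.pyRange 0 (cs.length : Int) 1)) :
    ∀ m : Nat, m ≤ sa.length →
      ((PySem.List.pyRange 0 (m : Int) 1).foldl
          (fun r i => PySem.List.pySetD r (PySem.List.pyGetD sa i 0) i)
          (List.replicate cs.length 0)).length = cs.length ∧
      (∀ t : Nat, t < m →
        PySem.List.pyGetD ((PySem.List.pyRange 0 (m : Int) 1).foldl
          (fun r i => PySem.List.pySetD r (PySem.List.pyGetD sa i 0) i)
          (List.replicate cs.length 0)) (sa.getD t 0) 0 = (t : Int)) := by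
  have hsalen : sa.length = cs.length := by
    rw [hperm.length_eq, PySem.List.length_pyRange_one]; omega
  have hnd : sa.Nodup := hperm.symm.nodup (PySem.List.nodup_pyRange_one 0 (cs.length : Int))
  have hval : ∀ t : Nat, t < sa.length → 0 ≤ sa.getD t 0 ∧ sa.getD t 0 < (cs.length : Int) := by
    intro t ht
    have : sa.getD t 0 ∈ sa := by
      rw [List.getD_eq_getElem sa 0 ht]; exact List.getElem_mem ht
    have := PySem.List.mem_pyRange_one.mp (hperm.mem_iff.mp this)
    omega
  intro m
  induction m with
  | zero =>
    intro _
    rw [show ((0 : Nat) : Int) = 0 by norm_num, PySem.List.pyRange_one_eq_nil (le_refl 0)]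
    simp
  | succ m ih =>
    intro hmn
    obtain ⟨ihlen, ihent⟩ := ih (by omega)
    have hsplit : PySem.List.pyRange 0 ((m + 1 : Nat) : Int) 1 =
        PySem.List.pyRange 0 (m : Int) 1 ++ [(m : Int)] := by
      rw [show ((m + 1 : Nat) : Int) = (m : Int) + 1 by omega]
      exact PySem.List.pyRange_one_succ_right (by omega)
    rw [hsplit, List.foldl_append]
    set F := (PySem.List.pyRange 0 (m : Int) 1).foldl
      (fun r i => PySem.List.pySetD r (PySem.List.pyGetD sa i 0) i)
      (List.replicate cs.length 0) with hF
    simp only [List.foldl_cons, List.foldl_nil]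
    have hmlt : m < sa.length := by omega
    have hcurr : PySem.List.pyGetD sa ((m : Int)) 0 = sa.getD m 0 := by
      rw [PySem.List.pyGetD_eq_getElem sa 0 (by omega) (by exact_mod_cast hmlt),
        List.getD_eq_getElem sa 0 hmlt]
      simp
    have hvm := hval m hmlt
    refine ⟨by rw [PySem.List.length_pySetD, ihlen], ?_⟩
    intro t ht
    have hvt := hval t (by omega)
    rw [hcurr, pvGetD_setD F _ hvm.1 (by rw [ihlen]; exact hvm.2) hvt.1]
    by_cases hteq : t = m
    · subst hteq
      rw [if_pos rfl]
    · have hne : sa.getD t 0 ≠ sa.getD m 0 := by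
        intro he
        apply hteq
        rw [List.getD_eq_getElem sa 0 (by omega), List.getD_eq_getElem sa 0 hmlt] at he
        exact hnd.getElem_inj_iff.mp he
      rw [if_neg hne]
      exact ihent t (by omega)

-- one iteration of the kasai_lcp main loop (with the rank array kr)
def pvKasaiStep (cs : List Char) (sa kr : List Int) : (List Int × Int) → Int → (List Int × Int) :=
  fun st i =>
    if 0 < PySem.List.pyGetD kr i 0 then
      let j := PySem.List.pyGetD sa (PySem.List.pyGetD kr i 0 - 1) 0
      let h' := pvKasaiExtend cs ((cs.length : Nat) : Int) i j st.2
      (PySem.List.pySetD st.1 (PySem.List.pyGetD kr i 0) h',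
       if 0 < h' then h' - 1 else h')
    else st

def pvKasaiInv (cs : List Char) (sa : List Int) (m : Nat) (st : List Int × Int) : Prop :=
  st.1.length = cs.length ∧
  (∀ r : Nat, r < cs.length → PySem.List.pyGetD st.1 (r : Int) 0 =
      if 1 ≤ r ∧ sa.getD r 0 < (m : Int) then (pvTrueL cs sa r : Int) else 0) ∧
  0 ≤ st.2 ∧
  (∀ r : Nat, r < sa.length → sa.getD r 0 = (m : Int) →
    (1 ≤ r → st.2.toNat ≤ pvTrueL cs sa r) ∧ (r = 0 → st.2 = 0))

theorem pvKasaiMain (cs : List Char) (sa kr : List Int)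
    (hperm : sa.Perm (PySem.List.pyRange 0 (cs.length : Int) 1))
    (hpair : sa.Pairwise (fun i j => pvSufx cs i < pvSufx cs j))
    (hkr : ∀ t : Nat, t < sa.length → PySem.List.pyGetD kr (sa.getD t 0) 0 = (t : Int)) :
    ∀ m : Nat, m ≤ cs.length →
      pvKasaiInv cs sa m ((PySem.List.pyRange 0 (m : Int) 1).foldl (pvKasaiStep cs sa kr)
        (List.replicate cs.length 0, 0)) := by
  have hsalen : sa.length = cs.length := by
    rw [hperm.length_eq, PySem.List.length_pyRange_one]; omega
  have hnd : sa.Nodup := hperm.symm.nodup (PySem.List.nodup_pyRange_one 0 (cs.length : Int))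
  have hval : ∀ t : Nat, t < sa.length → 0 ≤ sa.getD t 0 ∧ sa.getD t 0 < (cs.length : Int) := by
    intro t ht
    have : sa.getD t 0 ∈ sa := by
      rw [List.getD_eq_getElem sa 0 ht]; exact List.getElem_mem ht
    have := PySem.List.mem_pyRange_one.mp (hperm.mem_iff.mp this)
    omega
  have hinj : ∀ a b : Nat, a < sa.length → b < sa.length → sa.getD a 0 = sa.getD b 0 → a = b := by
    intro a b ha hb he
    rw [List.getD_eq_getElem sa 0 ha, List.getD_eq_getElem sa 0 hb] at he
    exact hnd.getElem_inj_iff.mp he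
  intro m
  induction m with
  | zero =>
    intro _
    rw [show ((0 : Nat) : Int) = 0 by norm_num, PySem.List.pyRange_one_eq_nil (le_refl 0)]
    simp only [List.foldl_nil]
    refine ⟨by simp, ?_, le_refl 0, ?_⟩
    · intro r hr
      rw [pvGetD_replicate cs.length (by omega) (by omega)]
      have := hval r (by omega)
      rw [if_neg (by omega)]
    · intro r hr hm
      exact ⟨fun _ => by simp, fun _ => rfl⟩
  | succ m ih =>
    intro hmn
    have hI := ih (by omega)
    have hsplit : PySem.List.pyRange 0 ((m + 1 : Nat) : Int) 1 =
        PySem.List.pyRange 0 (m : Int) 1 ++ [(m : Int)] := by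
      rw [show ((m + 1 : Nat) : Int) = (m : Int) + 1 by omega]
      exact PySem.List.pyRange_one_succ_right (by omega)
    rw [hsplit, List.foldl_append]
    set G := (PySem.List.pyRange 0 (m : Int) 1).foldl (pvKasaiStep cs sa kr)
      (List.replicate cs.length 0, 0) with hG
    simp only [List.foldl_cons, List.foldl_nil]
    obtain ⟨hGlen, hGent, hGh0, hGhb⟩ := hI
    have hmm : ((m : Int)) ∈ sa := hperm.mem_iff.mpr
      (PySem.List.mem_pyRange_one.mpr ⟨by omega, by omega⟩)
    obtain ⟨rm, hrmlt, hrme⟩ := List.mem_iff_getElem.mp hmm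
    have hrm : sa.getD rm 0 = (m : Int) := by
      rw [List.getD_eq_getElem sa 0 hrmlt]; exact hrme
    have hkrm : PySem.List.pyGetD kr ((m : Int)) 0 = (rm : Int) := by
      have := hkr rm hrmlt
      rwa [hrm] at this
    unfold pvKasaiStep
    rw [hkrm]
    by_cases hr1 : 1 ≤ rm
    · rw [if_pos (by exact_mod_cast Nat.pos_of_ne_zero (by omega))]
      have hjconv : PySem.List.pyGetD sa ((rm : Int) - 1) 0 = sa.getD (rm - 1) 0 := by
        rw [show (rm : Int) - 1 = ((rm - 1 : Nat) : Int) by omega,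
          PySem.List.pyGetD_eq_getElem sa 0 (by omega)
            (by exact_mod_cast (by omega : rm - 1 < sa.length)),
          List.getD_eq_getElem sa 0 (by omega)]
        simp
      rw [hjconv]
      have hvrm1 := hval (rm - 1) (by omega)
      have hTr : pvTrueL cs sa rm =
          pvLcpN (pvSufx cs ((m : Int))) (pvSufx cs (sa.getD (rm - 1) 0)) := by
        unfold pvTrueL
        rw [hrm]
      have hhb := (hGhb rm hrmlt hrm).1 hr1
      have hext : pvKasaiExtend cs ((cs.length : Nat) : Int) ((m : Int)) (sa.getD (rm - 1) 0) G.2 =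
          (pvLcpN (pvSufx cs ((m : Int))) (pvSufx cs (sa.getD (rm - 1) 0)) : Int) :=
        pvKasaiExtend_spec cs (by omega) hvrm1.1 hGh0 (by rw [← hTr]; exact hhb)
      show pvKasaiInv cs sa (m + 1)
        (PySem.List.pySetD G.1 ((rm : Int))
            (pvKasaiExtend cs ((cs.length : Nat) : Int) ((m : Int)) (sa.getD (rm - 1) 0) G.2),
         if 0 < pvKasaiExtend cs ((cs.length : Nat) : Int) ((m : Int)) (sa.getD (rm - 1) 0) G.2 then
           pvKasaiExtend cs ((cs.length : Nat) : Int) ((m : Int)) (sa.getD (rm - 1) 0) G.2 - 1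
         else pvKasaiExtend cs ((cs.length : Nat) : Int) ((m : Int)) (sa.getD (rm - 1) 0) G.2)
      rw [hext, ← hTr]
      unfold pvKasaiInv
      dsimp only
      refine ⟨?_, ?_, ?_, ?_⟩
      · rw [PySem.List.length_pySetD]
        exact hGlen
      · intro r hr
        rw [pvGetD_setD G.1 _ (by omega)
          (by rw [hGlen]; exact_mod_cast (by omega : rm < cs.length)) (by omega)]
        by_cases hreq : (r : Int) = (rm : Int)
        · have : r = rm := by omega
          subst this
          rw [if_pos rfl, if_pos ⟨hr1, by rw [hrm]; omega⟩]
        · rw [if_neg hreq, hGent r hr]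
          have hrne : sa.getD r 0 ≠ (m : Int) := by
            intro he
            exact hreq (by rw [hinj r rm (by omega) hrmlt (by rw [he, hrm])])
          by_cases hrc : 1 ≤ r ∧ sa.getD r 0 < (m : Int)
          · rw [if_pos hrc, if_pos ⟨hrc.1, by omega⟩]
          · rw [if_neg hrc, if_neg (by
              rintro ⟨h1, h2⟩
              exact hrc ⟨h1, by omega⟩)]
      · split_ifs <;> omega
      · intro r'' hr''lt hnext''
        have hnext : sa.getD rm 0 + 1 = sa.getD r'' 0 := by
          rw [hrm, hnext'']
          omega
        constructor
        · intro hr''1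
          by_cases hh : 0 < ((pvTrueL cs sa rm : Nat) : Int)
          · rw [if_pos hh]
            have hk1 := pvKey1 cs sa hperm hpair hr1 hrmlt hr''1 hr''lt hnext (by omega)
            omega
          · rw [if_neg hh]
            omega
        · intro hr''0
          subst hr''0
          have hk2 := pvKey2 cs sa hperm hpair hr1 hrmlt hnext
          split_ifs with hh
          · omega
          · omega
    · -- rank[i] = 0 : the state is unchanged
      have hrm0 : rm = 0 := by omega
      rw [if_neg (by omega)]
      have hG2 : G.2 = 0 := (hGhb rm hrmlt hrm).2 hrm0
      refine ⟨hGlen, ?_, hGh0, ?_⟩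
      · intro r hr
        rw [hGent r hr]
        have hrne : 1 ≤ r → sa.getD r 0 ≠ (m : Int) := by
          intro h1 he
          have := hinj r rm (by omega) hrmlt (by rw [he, hrm])
          omega
        by_cases hrc : 1 ≤ r ∧ sa.getD r 0 < (m : Int)
        · rw [if_pos hrc, if_pos ⟨hrc.1, by omega⟩]
        · rw [if_neg hrc, if_neg (by
            rintro ⟨h1, h2⟩
            exact hrc ⟨h1, by have := hrne h1; omega⟩)]
      · intro r'' hlt hnext''
        exact ⟨fun _ => by rw [hG2]; simp, fun _ => hG2⟩

theorem pvKasaiLcp_spec (cs : List Char) (sa : List Int)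
    (hperm : sa.Perm (PySem.List.pyRange 0 (cs.length : Int) 1))
    (hpair : sa.Pairwise (fun i j => pvSufx cs i < pvSufx cs j)) :
    (pvKasaiLcp cs sa).length = cs.length ∧
    ∀ r : Nat, r < cs.length → PySem.List.pyGetD (pvKasaiLcp cs sa) (r : Int) 0 =
      if 1 ≤ r then (pvTrueL cs sa r : Int) else 0 := by
  have hsalen : sa.length = cs.length := by
    rw [hperm.length_eq, PySem.List.length_pyRange_one]; omega
  have hval : ∀ t : Nat, t < sa.length → 0 ≤ sa.getD t 0 ∧ sa.getD t 0 < (cs.length : Int) := by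
    intro t ht
    have : sa.getD t 0 ∈ sa := by
      rw [List.getD_eq_getElem sa 0 ht]; exact List.getElem_mem ht
    have := PySem.List.mem_pyRange_one.mp (hperm.mem_iff.mp this)
    omega
  obtain ⟨hkrlen, hkrent⟩ := pvKasaiRank_spec cs sa hperm sa.length (le_refl _)
  rw [hsalen] at hkrent
  have hmain := pvKasaiMain cs sa
    ((PySem.List.pyRange 0 ((cs.length : Nat) : Int) 1).foldl
      (fun r i => PySem.List.pySetD r (PySem.List.pyGetD sa i 0) i)
      (List.replicate cs.length 0)) hperm hpair
    (by intro t ht; exact hkrent t (by omega)) cs.length (le_refl _)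
  obtain ⟨hL1, hL2, _, _⟩ := hmain
  have hrw : pvKasaiLcp cs sa = ((PySem.List.pyRange 0 ((cs.length : Nat) : Int) 1).foldl
      (pvKasaiStep cs sa ((PySem.List.pyRange 0 ((cs.length : Nat) : Int) 1).foldl
        (fun r i => PySem.List.pySetD r (PySem.List.pyGetD sa i 0) i)
        (List.replicate cs.length 0)))
      (List.replicate cs.length 0, 0)).1 := rfl
  rw [hrw]
  refine ⟨hL1, ?_⟩
  intro r hr
  rw [hL2 r hr]
  by_cases h1 : 1 ≤ r
  · rw [if_pos ⟨h1, (hval r (by omega)).2⟩, if_pos h1]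
  · rw [if_neg (fun hc => h1 hc.1), if_neg h1]

-- the lcp array as an explicit list
theorem pvKasaiLcp_eq_map (cs : List Char) (sa : List Int)
    (hperm : sa.Perm (PySem.List.pyRange 0 (cs.length : Int) 1))
    (hpair : sa.Pairwise (fun i j => pvSufx cs i < pvSufx cs j)) :
    pvKasaiLcp cs sa = (List.range cs.length).map
      (fun r => if 1 ≤ r then (pvTrueL cs sa r : Int) else 0) := by
  obtain ⟨hlen, hent⟩ := pvKasaiLcp_spec cs sa hperm hpair
  apply List.ext_getElem
  · simp [hlen]
  · intro r h1 h2
    have hr : r < cs.length := by omega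
    have := hent r hr
    rw [PySem.List.pyGetD_eq_getElem _ 0 (by omega) (by rw [hlen]; exact_mod_cast hr)] at this
    simpa using this

-- the duplicate count of implementation B, as the same sum
theorem pvDup_eq (cs : List Char) (sa : List Int)
    (hperm : sa.Perm (PySem.List.pyRange 0 (cs.length : Int) 1)) :
    ∀ m : Nat, m ≤ cs.length →
      (PySem.List.pyRange 1 (m : Int) 1).foldl (fun d r =>
        d + pvLcpB (PySem.List.slice cs (some (PySem.List.pyGetD sa (r - 1) 0)) none)
                   (PySem.List.slice cs (some (PySem.List.pyGetD sa r 0)) none)) 0 =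
      ((List.range m).map (fun r => if 1 ≤ r then (pvTrueL cs sa r : Int) else 0)).sum := by
  have hsalen : sa.length = cs.length := by
    rw [hperm.length_eq, PySem.List.length_pyRange_one]; omega
  have hval : ∀ t : Nat, t < sa.length → 0 ≤ sa.getD t 0 ∧ sa.getD t 0 < (cs.length : Int) := by
    intro t ht
    have : sa.getD t 0 ∈ sa := by
      rw [List.getD_eq_getElem sa 0 ht]; exact List.getElem_mem ht
    have := PySem.List.mem_pyRange_one.mp (hperm.mem_iff.mp this)
    omega
  have hconv : ∀ t : Nat, t < sa.length →
      PySem.List.pyGetD sa ((t : Nat) : Int) 0 = sa.getD t 0 := by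
    intro t ht
    rw [PySem.List.pyGetD_eq_getElem sa 0 (by omega) (by exact_mod_cast ht),
      List.getD_eq_getElem sa 0 ht]
    simp
  intro m
  induction m with
  | zero =>
    intro _
    rw [show ((0 : Nat) : Int) = 0 by norm_num, PySem.List.pyRange_one_eq_nil (by omega)]
    simp
  | succ m ih =>
    intro hmn
    rcases Nat.eq_zero_or_pos m with hm0 | hm0
    · subst hm0
      rw [show ((1 : Nat) : Int) = 1 by norm_num, PySem.List.pyRange_one_eq_nil (by omega)]
      simp
    · have hsplit : PySem.List.pyRange 1 ((m + 1 : Nat) : Int) 1 =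
          PySem.List.pyRange 1 (m : Int) 1 ++ [(m : Int)] := by
        rw [show ((m + 1 : Nat) : Int) = (m : Int) + 1 by omega]
        exact PySem.List.pyRange_one_succ_right (by omega)
      rw [hsplit, List.foldl_append]
      simp only [List.foldl_cons, List.foldl_nil]
      rw [ih (by omega)]
      have hmlt : m < sa.length := by omega
      have hm1lt : m - 1 < sa.length := by omega
      have hc1 : PySem.List.pyGetD sa ((m : Int) - 1) 0 = sa.getD (m - 1) 0 := by
        rw [show (m : Int) - 1 = ((m - 1 : Nat) : Int) by omega]
        exact hconv (m - 1) hm1lt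
      rw [hc1, hconv m hmlt]
      rw [PySem.List.slice_from _ (hval (m - 1) hm1lt).1, PySem.List.slice_from _ (hval m hmlt).1]
      rw [List.range_succ, List.map_append, List.sum_append]
      simp only [List.map_cons, List.map_nil, List.sum_cons, List.sum_nil]
      rw [pvLcpB_eq]
      have : pvLcpN (cs.drop (sa.getD (m - 1) 0).toNat) (cs.drop (sa.getD m 0).toNat) =
          pvTrueL cs sa m := by
        unfold pvTrueL pvSufx
        rw [pvLcpN_comm]
      rw [this, if_pos (by omega)]
      omega

-- B's direct sort of the suffixes IS the suffix array of A
theorem pvOrder_eq (cs : List Char) :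
    PySem.List.sorted (PySem.List.pyRange 0 ((cs.length : Nat) : Int) 1)
      (fun i => PySem.List.slice cs (some i) none) false = pvBuildSuffixArray cs := by
  obtain ⟨hperm, hpair⟩ := pvBuildSA_spec cs
  have hinst : (fun (a b : List Char) => a.decidableLT b) =
      (inferInstance : LinearOrder (List Char)).toDecidableLT := by
    funext a b
    exact Subsingleton.elim _ _
  have hpw : List.Pairwise (fun a b =>
      PySem.List.slice cs (some a) none < PySem.List.slice cs (some b) none)
      (pvBuildSuffixArray cs) := by
    refine hpair.imp_of_mem ?_
    intro a b ha hb h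
    have ha0 : 0 ≤ a := by
      have := PySem.List.mem_pyRange_one.mp (hperm.mem_iff.mp ha); omega
    have hb0 : 0 ≤ b := by
      have := PySem.List.mem_pyRange_one.mp (hperm.mem_iff.mp hb); omega
    rw [PySem.List.slice_from cs ha0, PySem.List.slice_from cs hb0]
    exact h
  rw [hinst]
  exact PySem.List.sorted_eq_of_perm_of_pairwise_lt _ _ _ hperm hpw

-- the nested add-loop of A builds the same set as the comprehension of B
theorem pvSet2_eq (cs : List Char) :
    (PySem.List.pyRange 0 ((cs.length : Nat) : Int) 1).foldl (fun st i =>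
      (PySem.List.pyRange (i + 1) (((cs.length : Nat) : Int) + 1) 1).foldl (fun st j =>
        PySem.Set.add st (PySem.List.slice cs (some i) (some j))) st) PySem.Set.empty =
    PySem.Set.ofList ((PySem.List.pyRange 0 ((cs.length : Nat) : Int) 1).flatMap (fun i =>
      (PySem.List.pyRange (i + 1) (((cs.length : Nat) : Int) + 1) 1).map (fun j =>
        PySem.List.slice cs (some i) (some j)))) := by
  rw [PySem.Set.ofList_eq_foldl, List.foldl_flatMap]
  simp only [List.foldl_map]
  rfl

-- the two total counts agree
theorem pvTotal_eq (cs : List Char) (hn : cs.length ≠ 0) :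
    pvCountDistinct cs =
      PySem.Int.floordiv ((cs.length : Int) * ((cs.length : Int) + 1)) 2 -
        (PySem.List.pyRange 1 ((cs.length : Nat) : Int) 1).foldl (fun d r =>
          d + pvLcpB
            (PySem.List.slice cs
              (some (PySem.List.pyGetD (pvBuildSuffixArray cs) (r - 1) 0)) none)
            (PySem.List.slice cs
              (some (PySem.List.pyGetD (pvBuildSuffixArray cs) r 0)) none)) 0 := by
  obtain ⟨hperm, hpair⟩ := pvBuildSA_spec cs
  unfold pvCountDistinct
  rw [if_neg (by omega : ¬ ((cs.length : Int) = 0))]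
  show PySem.Int.floordiv ((cs.length : Int) * ((cs.length : Int) + 1)) 2 -
      (pvKasaiLcp cs (pvBuildSuffixArray cs)).sum = _
  rw [pvKasaiLcp_eq_map cs (pvBuildSuffixArray cs) hperm hpair,
    pvDup_eq cs (pvBuildSuffixArray cs) hperm cs.length (le_refl _)]

-- ===== VERDICT (by name: the statement is the Claim_ definition above) =====
theorem diff_substrings_two_strings_spec : Claim_equal_diff_substrings_two_strings := by
  intro s1 s2 _
  unfold Spec_diff_substrings_two_strings
  unfold diff_substrings_two_strings diff_substrings_two_strings_alt
  dsimp only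
  rw [pvSet2_eq s2.toList]
  by_cases hn : s1.toList.length = 0
  · rw [if_neg (fun hc => hc hn)]
    unfold pvCountDistinct
    rw [if_pos (by omega : ((s1.toList.length : Int) = 0))]
  · rw [if_pos hn, pvOrder_eq s1.toList, pvTotal_eq s1.toList hn]
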